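/-
  EVERY SSE FORM OF THE IMAGE THROUGH THE STEPPER (generated: tools/ssestep/gen.py on c/vorbis_f_insns.txt).

  For each of the 51 forms (mnemonic × operand shape × addressing mode, as c/sse_forms.py classifies them) the first occurrence
  in the image is decoded by `#udecode` — a kernel-checked decode fact of UserX/Decode.lean, as the image's bulk facts are —
  and stepped by `u_step_at` from a state whose sixteen registers and RFLAGS are named and whose RIP is the instruction's own
  address (so that a RIP-relative operand is a literal address and the alignment of an `xmm, m128` operand evaluates).

  What a step must leave is CHECKED (`u_expect_goals`): for a register form `[cont]`; for a memory form `[side_has, cont]`.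
  The hypotheses of the proof are the ones a farm proof carries: `hμ : UserX.MicroOK μ`, `hs : SseOK u`.
  `hHas` is there to close the `side_has` goals (it is not meant to be satisfiable). At the end: the struct copy of
  `vorbis_init` with the EXACT rules, and `u_step_code` on a function's code.
-/
import UserX.SseStep
import UserX.InsnTerm
open X86 X86.Sem X86.User

set_option linter.unusedSimpArgs false
set_option linter.unusedVariables false
set_option maxRecDepth 2000

namespace UserX
open Lean Meta Elab Tactic

/-- `u_expect_goals [a, b]`: the goals left have exactly these tags, in this order. -/
elab "u_expect_goals " "[" tags:ident,* "]" : tactic => do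
  let want := tags.getElems.toList.map fun t => t.getId
  let mut have_ : List Name := []
  for g in ← getUnsolvedGoals do
    have_ := have_ ++ [(← g.getTag).eraseMacroScopes]
  unless want == have_ do
    throwError "u_expect_goals: expected {want}, the step left {have_}"

end UserX

namespace X86.User.SseStepTest

/-! ### The decode facts -/

-- addsd xmm0,QWORD PTR [rip+0x1dc6d]   (0x10247b; 12 of this form in the image)
#udecode d_addsd_x_m64_rip "f2 0f 58 05 6d dc 01 00"
-- addsd xmm0,xmm0   (0x1025ef; 21 of this form in the image)
#udecode d_addsd_x_x "f2 0f 58 c0"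
-- addss xmm0,DWORD PTR [rsp+0x8]   (0x105064; 53 of this form in the image)
#udecode d_addss_x_m32_base "f3 0f 58 44 24 08"
-- addss xmm0,DWORD PTR [rip+0x14a21]   (0x10bab7; 2 of this form in the image)
#udecode d_addss_x_m32_rip "f3 0f 58 05 21 4a 01 00"
-- addss xmm0,xmm1   (0x1050d0; 38 of this form in the image)
#udecode d_addss_x_x "f3 0f 58 c1"
-- comisd xmm0,QWORD PTR [rip+0x1dd70]   (0x102380; 3 of this form in the image)
#udecode d_comisd_x_m64_rip "66 0f 2f 05 70 dd 01 00"
-- comisd xmm1,xmm0   (0x102392; 11 of this form in the image)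
#udecode d_comisd_x_x "66 0f 2f c8"
-- comiss xmm2,xmm0   (0x111723; 3 of this form in the image)
#udecode d_comiss_x_x "0f 2f d0"
-- cvtsd2ss xmm0,xmm0   (0x10b9a7; 11 of this form in the image)
#udecode d_cvtsd2ss_x_x "f2 0f 5a c0"
-- cvtsi2sd xmm2,DWORD PTR [rsp+0xc]   (0x10bc9e; 2 of this form in the image)
#udecode d_cvtsi2sd_x_m32_base "f2 0f 2a 54 24 0c"
-- cvtsi2sd xmm3,eax   (0x102a71; 8 of this form in the image)
#udecode d_cvtsi2sd_x_r32 "f2 0f 2a d8"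
-- cvtsi2sd xmm1,rax   (0x1023a1; 4 of this form in the image)
#udecode d_cvtsi2sd_x_r64 "f2 48 0f 2a c8"
-- cvtsi2ss xmm0,edi   (0x10ba71; 6 of this form in the image)
#udecode d_cvtsi2ss_x_r32 "f3 0f 2a c7"
-- cvtss2sd xmm0,DWORD PTR [rsp+0xc]   (0x10bb15; 1 of this form in the image)
#udecode d_cvtss2sd_x_m32_base "f3 0f 5a 44 24 0c"
-- cvtss2sd xmm0,xmm0   (0x10b9b1; 6 of this form in the image)
#udecode d_cvtss2sd_x_x "f3 0f 5a c0"
-- cvttsd2si eax,xmm1   (0x1024b1; 6 of this form in the image)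
#udecode d_cvttsd2si_r32_x "f2 0f 2c c1"
-- cvttsd2si rax,xmm0   (0x102398; 1 of this form in the image)
#udecode d_cvttsd2si_r64_x "f2 48 0f 2c c0"
-- divsd xmm0,QWORD PTR [rsp+0x28]   (0x10bd30; 1 of this form in the image)
#udecode d_divsd_x_m64_base "f2 0f 5e 44 24 28"
-- divsd xmm3,QWORD PTR [rip+0x1e1f4]   (0x101e6c; 26 of this form in the image)
#udecode d_divsd_x_m64_rip "f2 0f 5e 1d f4 e1 01 00"
-- divsd xmm2,xmm0   (0x1029d9; 6 of this form in the image)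
#udecode d_divsd_x_x "f2 0f 5e d0"
-- divss xmm0,xmm1   (0x10ba8b; 1 of this form in the image)
#udecode d_divss_x_x "f3 0f 5e c1"
-- movapd xmm0,xmm1   (0x101dc0; 61 of this form in the image)
#udecode d_movapd_x_x "66 0f 28 c1"
-- movaps xmm0,xmm4   (0x1050a8; 45 of this form in the image)
#udecode d_movaps_x_x "0f 28 c4"
-- movd r13d,xmm3   (0x105094; 35 of this form in the image)
#udecode d_movd_r32_x "66 41 0f 7e dd"
-- movd xmm2,r15d   (0x105022; 93 of this form in the image)
#udecode d_movd_x_r32 "66 41 0f 6e d7"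
-- movdqu xmm0,XMMWORD PTR [rbp+0x0]   (0x108031; 1 of this form in the image)
#udecode d_movdqu_x_m128_base "f3 0f 6f 45 00"
-- movq rbx,xmm0   (0x102450; 6 of this form in the image)
#udecode d_movq_r64_x "66 48 0f 7e c3"
-- movq xmm0,rdi   (0x101d0a; 13 of this form in the image)
#udecode d_movq_x_r64 "66 48 0f 6e c7"
-- movsd QWORD PTR [rsp],xmm0   (0x102205; 9 of this form in the image)
#udecode d_movsd_m64_base_x "f2 0f 11 04 24"
-- movsd xmm1,QWORD PTR [rsp]   (0x10221e; 7 of this form in the image)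
#udecode d_movsd_x_m64_base "f2 0f 10 0c 24"
-- movsd xmm1,QWORD PTR [rip+0x1e2b8]   (0x101da0; 12 of this form in the image)
#udecode d_movsd_x_m64_rip "f2 0f 10 0d b8 e2 01 00"
-- movss DWORD PTR [rsp+0x8],xmm6   (0x105027; 244 of this form in the image)
#udecode d_movss_m32_base_x "f3 0f 11 74 24 08"
-- movss xmm6,DWORD PTR [rbx]   (0x10501e; 217 of this form in the image)
#udecode d_movss_x_m32_base "f3 0f 10 33"
-- movss xmm1,DWORD PTR [rip+0x1980b]   (0x106bed; 1 of this form in the image)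
#udecode d_movss_x_m32_rip "f3 0f 10 0d 0b 98 01 00"
-- movups XMMWORD PTR [rbx+0x70],xmm0   (0x108036; 1 of this form in the image)
#udecode d_movups_m128_base_x "0f 11 43 70"
-- mulsd xmm0,QWORD PTR [rsp]   (0x1022ab; 2 of this form in the image)
#udecode d_mulsd_x_m64_base "f2 0f 59 04 24"
-- mulsd xmm0,QWORD PTR [rip+0x1dfe0]   (0x102108; 19 of this form in the image)
#udecode d_mulsd_x_m64_rip "f2 0f 59 05 e0 df 01 00"
-- mulsd xmm0,xmm0   (0x101daa; 52 of this form in the image)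
#udecode d_mulsd_x_x "f2 0f 59 c0"
-- mulss xmm3,DWORD PTR [rbp+0x0]   (0x10508f; 56 of this form in the image)
#udecode d_mulss_x_m32_base "f3 0f 59 5d 00"
-- mulss xmm0,DWORD PTR [rip+0x14788]   (0x10bd54; 2 of this form in the image)
#udecode d_mulss_x_m32_rip "f3 0f 59 05 88 47 01 00"
-- mulss xmm0,DWORD PTR [r13*4+0x120680]   (0x1087cd; 3 of this form in the image)
#udecode d_mulss_x_m32_sib "f3 42 0f 59 04 ad 80 06 12 00"
-- mulss xmm0,xmm0   (0x104060; 41 of this form in the image)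
#udecode d_mulss_x_x "f3 0f 59 c0"
-- pxor xmm1,xmm1   (0x10239d; 37 of this form in the image)
#udecode d_pxor_x_x "66 0f ef c9"
-- subsd xmm1,QWORD PTR [rip+0x1dcac]   (0x1023ac; 1 of this form in the image)
#udecode d_subsd_x_m64_rip "f2 0f 5c 0d ac dc 01 00"
-- subsd xmm4,xmm3   (0x101e80; 25 of this form in the image)
#udecode d_subsd_x_x "f2 0f 5c e3"
-- subss xmm4,DWORD PTR [rbx-0x4]   (0x105054; 16 of this form in the image)
#udecode d_subss_x_m32_base "f3 0f 5c 63 fc"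
-- subss xmm2,xmm6   (0x10502d; 65 of this form in the image)
#udecode d_subss_x_x "f3 0f 5c d6"
-- ucomisd xmm4,xmm4   (0x1025db; 4 of this form in the image)
#udecode d_ucomisd_x_x "66 0f 2e e4"
-- xorpd xmm0,XMMWORD PTR [rip+0x1db2d]   (0x1024cb; 4 of this form in the image)
#udecode d_xorpd_x_m128_rip "66 0f 57 05 2d db 01 00"
-- xorps xmm0,XMMWORD PTR [rip+0x17026]   (0x1093d3; 13 of this form in the image)
#udecode d_xorps_x_m128_rip "0f 57 05 26 70 01 00"
-- xorps xmm0,xmm1   (0x106bfb; 2 of this form in the image)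
#udecode d_xorps_x_x "0f 57 c1"

/-! ### The steps -/

section
variable {L : Layout} {μ : Microarch} {u : State} {Q : State → Prop}
variable (rax rcx rdx rbx rsp rbp rsi rdi r8 r9 r10 r11 r12 r13 r14 r15 : Word) (fl : Flags)

/-- `addsd xmm0,QWORD PTR [rip+0x1dc6d]` -/
example (hc : CodeAt u.mem u.rip [0xf2, 0x0f, 0x58, 0x05, 0x6d, 0xdc, 0x01, 0x00]) (hr : L.Has u.rip 8)
    (h_rax : u.reg .rax = rax) (h_rcx : u.reg .rcx = rcx) (h_rdx : u.reg .rdx = rdx) (h_rbx : u.reg .rbx = rbx) (h_rsp : u.reg .rsp = rsp) (h_rbp : u.reg .rbp = rbp) (h_rsi : u.reg .rsi = rsi) (h_rdi : u.reg .rdi = rdi) (h_r8 : u.reg .r8 = r8) (h_r9 : u.reg .r9 = r9) (h_r10 : u.reg .r10 = r10) (h_r11 : u.reg .r11 = r11) (h_r12 : u.reg .r12 = r12) (h_r13 : u.reg .r13 = r13) (h_r14 : u.reg .r14 = r14) (h_r15 : u.reg .r15 = r15)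
    (h_rip : u.rip = 0x10247b) (h_fl : u.flags = fl) (hμ : UserX.MicroOK μ) (hs : SseOK u)
    (hHas : ∀ a n, L.Has a n) (hQ : ∀ v, Q v) : Step L μ u Q := by
  u_step_at d_addsd_x_m64_rip hc hr [h_rax, h_rcx, h_rdx, h_rbx, h_rsp, h_rbp, h_rsi, h_rdi, h_r8, h_r9, h_r10, h_r11, h_r12, h_r13, h_r14, h_r15, h_rip, h_fl, hμ.vendor]
  u_expect_goals [side_has, cont]
  all_goals first | exact hHas _ _ | exact hQ _

/-- `addsd xmm0,xmm0` -/
example (hc : CodeAt u.mem u.rip [0xf2, 0x0f, 0x58, 0xc0]) (hr : L.Has u.rip 4)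
    (h_rax : u.reg .rax = rax) (h_rcx : u.reg .rcx = rcx) (h_rdx : u.reg .rdx = rdx) (h_rbx : u.reg .rbx = rbx) (h_rsp : u.reg .rsp = rsp) (h_rbp : u.reg .rbp = rbp) (h_rsi : u.reg .rsi = rsi) (h_rdi : u.reg .rdi = rdi) (h_r8 : u.reg .r8 = r8) (h_r9 : u.reg .r9 = r9) (h_r10 : u.reg .r10 = r10) (h_r11 : u.reg .r11 = r11) (h_r12 : u.reg .r12 = r12) (h_r13 : u.reg .r13 = r13) (h_r14 : u.reg .r14 = r14) (h_r15 : u.reg .r15 = r15)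
    (h_rip : u.rip = 0x1025ef) (h_fl : u.flags = fl) (hμ : UserX.MicroOK μ) (hs : SseOK u)
    (hHas : ∀ a n, L.Has a n) (hQ : ∀ v, Q v) : Step L μ u Q := by
  u_step_at d_addsd_x_x hc hr [h_rax, h_rcx, h_rdx, h_rbx, h_rsp, h_rbp, h_rsi, h_rdi, h_r8, h_r9, h_r10, h_r11, h_r12, h_r13, h_r14, h_r15, h_rip, h_fl, hμ.vendor]
  u_expect_goals [cont]
  all_goals first | exact hHas _ _ | exact hQ _

/-- `addss xmm0,DWORD PTR [rsp+0x8]` -/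
example (hc : CodeAt u.mem u.rip [0xf3, 0x0f, 0x58, 0x44, 0x24, 0x08]) (hr : L.Has u.rip 6)
    (h_rax : u.reg .rax = rax) (h_rcx : u.reg .rcx = rcx) (h_rdx : u.reg .rdx = rdx) (h_rbx : u.reg .rbx = rbx) (h_rsp : u.reg .rsp = rsp) (h_rbp : u.reg .rbp = rbp) (h_rsi : u.reg .rsi = rsi) (h_rdi : u.reg .rdi = rdi) (h_r8 : u.reg .r8 = r8) (h_r9 : u.reg .r9 = r9) (h_r10 : u.reg .r10 = r10) (h_r11 : u.reg .r11 = r11) (h_r12 : u.reg .r12 = r12) (h_r13 : u.reg .r13 = r13) (h_r14 : u.reg .r14 = r14) (h_r15 : u.reg .r15 = r15)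
    (h_rip : u.rip = 0x105064) (h_fl : u.flags = fl) (hμ : UserX.MicroOK μ) (hs : SseOK u)
    (hHas : ∀ a n, L.Has a n) (hQ : ∀ v, Q v) : Step L μ u Q := by
  u_step_at d_addss_x_m32_base hc hr [h_rax, h_rcx, h_rdx, h_rbx, h_rsp, h_rbp, h_rsi, h_rdi, h_r8, h_r9, h_r10, h_r11, h_r12, h_r13, h_r14, h_r15, h_rip, h_fl, hμ.vendor]
  u_expect_goals [side_has, cont]
  all_goals first | exact hHas _ _ | exact hQ _

/-- `addss xmm0,DWORD PTR [rip+0x14a21]` -/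
example (hc : CodeAt u.mem u.rip [0xf3, 0x0f, 0x58, 0x05, 0x21, 0x4a, 0x01, 0x00]) (hr : L.Has u.rip 8)
    (h_rax : u.reg .rax = rax) (h_rcx : u.reg .rcx = rcx) (h_rdx : u.reg .rdx = rdx) (h_rbx : u.reg .rbx = rbx) (h_rsp : u.reg .rsp = rsp) (h_rbp : u.reg .rbp = rbp) (h_rsi : u.reg .rsi = rsi) (h_rdi : u.reg .rdi = rdi) (h_r8 : u.reg .r8 = r8) (h_r9 : u.reg .r9 = r9) (h_r10 : u.reg .r10 = r10) (h_r11 : u.reg .r11 = r11) (h_r12 : u.reg .r12 = r12) (h_r13 : u.reg .r13 = r13) (h_r14 : u.reg .r14 = r14) (h_r15 : u.reg .r15 = r15)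
    (h_rip : u.rip = 0x10bab7) (h_fl : u.flags = fl) (hμ : UserX.MicroOK μ) (hs : SseOK u)
    (hHas : ∀ a n, L.Has a n) (hQ : ∀ v, Q v) : Step L μ u Q := by
  u_step_at d_addss_x_m32_rip hc hr [h_rax, h_rcx, h_rdx, h_rbx, h_rsp, h_rbp, h_rsi, h_rdi, h_r8, h_r9, h_r10, h_r11, h_r12, h_r13, h_r14, h_r15, h_rip, h_fl, hμ.vendor]
  u_expect_goals [side_has, cont]
  all_goals first | exact hHas _ _ | exact hQ _

/-- `addss xmm0,xmm1` -/
example (hc : CodeAt u.mem u.rip [0xf3, 0x0f, 0x58, 0xc1]) (hr : L.Has u.rip 4)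
    (h_rax : u.reg .rax = rax) (h_rcx : u.reg .rcx = rcx) (h_rdx : u.reg .rdx = rdx) (h_rbx : u.reg .rbx = rbx) (h_rsp : u.reg .rsp = rsp) (h_rbp : u.reg .rbp = rbp) (h_rsi : u.reg .rsi = rsi) (h_rdi : u.reg .rdi = rdi) (h_r8 : u.reg .r8 = r8) (h_r9 : u.reg .r9 = r9) (h_r10 : u.reg .r10 = r10) (h_r11 : u.reg .r11 = r11) (h_r12 : u.reg .r12 = r12) (h_r13 : u.reg .r13 = r13) (h_r14 : u.reg .r14 = r14) (h_r15 : u.reg .r15 = r15)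
    (h_rip : u.rip = 0x1050d0) (h_fl : u.flags = fl) (hμ : UserX.MicroOK μ) (hs : SseOK u)
    (hHas : ∀ a n, L.Has a n) (hQ : ∀ v, Q v) : Step L μ u Q := by
  u_step_at d_addss_x_x hc hr [h_rax, h_rcx, h_rdx, h_rbx, h_rsp, h_rbp, h_rsi, h_rdi, h_r8, h_r9, h_r10, h_r11, h_r12, h_r13, h_r14, h_r15, h_rip, h_fl, hμ.vendor]
  u_expect_goals [cont]
  all_goals first | exact hHas _ _ | exact hQ _

/-- `comisd xmm0,QWORD PTR [rip+0x1dd70]` -/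
example (hc : CodeAt u.mem u.rip [0x66, 0x0f, 0x2f, 0x05, 0x70, 0xdd, 0x01, 0x00]) (hr : L.Has u.rip 8)
    (h_rax : u.reg .rax = rax) (h_rcx : u.reg .rcx = rcx) (h_rdx : u.reg .rdx = rdx) (h_rbx : u.reg .rbx = rbx) (h_rsp : u.reg .rsp = rsp) (h_rbp : u.reg .rbp = rbp) (h_rsi : u.reg .rsi = rsi) (h_rdi : u.reg .rdi = rdi) (h_r8 : u.reg .r8 = r8) (h_r9 : u.reg .r9 = r9) (h_r10 : u.reg .r10 = r10) (h_r11 : u.reg .r11 = r11) (h_r12 : u.reg .r12 = r12) (h_r13 : u.reg .r13 = r13) (h_r14 : u.reg .r14 = r14) (h_r15 : u.reg .r15 = r15)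
    (h_rip : u.rip = 0x102380) (h_fl : u.flags = fl) (hμ : UserX.MicroOK μ) (hs : SseOK u)
    (hHas : ∀ a n, L.Has a n) (hQ : ∀ v, Q v) : Step L μ u Q := by
  u_step_at d_comisd_x_m64_rip hc hr [h_rax, h_rcx, h_rdx, h_rbx, h_rsp, h_rbp, h_rsi, h_rdi, h_r8, h_r9, h_r10, h_r11, h_r12, h_r13, h_r14, h_r15, h_rip, h_fl, hμ.vendor]
  u_expect_goals [side_has, cont]
  all_goals first | exact hHas _ _ | exact hQ _

/-- `comisd xmm1,xmm0` -/
example (hc : CodeAt u.mem u.rip [0x66, 0x0f, 0x2f, 0xc8]) (hr : L.Has u.rip 4)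
    (h_rax : u.reg .rax = rax) (h_rcx : u.reg .rcx = rcx) (h_rdx : u.reg .rdx = rdx) (h_rbx : u.reg .rbx = rbx) (h_rsp : u.reg .rsp = rsp) (h_rbp : u.reg .rbp = rbp) (h_rsi : u.reg .rsi = rsi) (h_rdi : u.reg .rdi = rdi) (h_r8 : u.reg .r8 = r8) (h_r9 : u.reg .r9 = r9) (h_r10 : u.reg .r10 = r10) (h_r11 : u.reg .r11 = r11) (h_r12 : u.reg .r12 = r12) (h_r13 : u.reg .r13 = r13) (h_r14 : u.reg .r14 = r14) (h_r15 : u.reg .r15 = r15)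
    (h_rip : u.rip = 0x102392) (h_fl : u.flags = fl) (hμ : UserX.MicroOK μ) (hs : SseOK u)
    (hHas : ∀ a n, L.Has a n) (hQ : ∀ v, Q v) : Step L μ u Q := by
  u_step_at d_comisd_x_x hc hr [h_rax, h_rcx, h_rdx, h_rbx, h_rsp, h_rbp, h_rsi, h_rdi, h_r8, h_r9, h_r10, h_r11, h_r12, h_r13, h_r14, h_r15, h_rip, h_fl, hμ.vendor]
  u_expect_goals [cont]
  all_goals first | exact hHas _ _ | exact hQ _

/-- `comiss xmm2,xmm0` -/
example (hc : CodeAt u.mem u.rip [0x0f, 0x2f, 0xd0]) (hr : L.Has u.rip 3)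
    (h_rax : u.reg .rax = rax) (h_rcx : u.reg .rcx = rcx) (h_rdx : u.reg .rdx = rdx) (h_rbx : u.reg .rbx = rbx) (h_rsp : u.reg .rsp = rsp) (h_rbp : u.reg .rbp = rbp) (h_rsi : u.reg .rsi = rsi) (h_rdi : u.reg .rdi = rdi) (h_r8 : u.reg .r8 = r8) (h_r9 : u.reg .r9 = r9) (h_r10 : u.reg .r10 = r10) (h_r11 : u.reg .r11 = r11) (h_r12 : u.reg .r12 = r12) (h_r13 : u.reg .r13 = r13) (h_r14 : u.reg .r14 = r14) (h_r15 : u.reg .r15 = r15)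
    (h_rip : u.rip = 0x111723) (h_fl : u.flags = fl) (hμ : UserX.MicroOK μ) (hs : SseOK u)
    (hHas : ∀ a n, L.Has a n) (hQ : ∀ v, Q v) : Step L μ u Q := by
  u_step_at d_comiss_x_x hc hr [h_rax, h_rcx, h_rdx, h_rbx, h_rsp, h_rbp, h_rsi, h_rdi, h_r8, h_r9, h_r10, h_r11, h_r12, h_r13, h_r14, h_r15, h_rip, h_fl, hμ.vendor]
  u_expect_goals [cont]
  all_goals first | exact hHas _ _ | exact hQ _

/-- `cvtsd2ss xmm0,xmm0` -/
example (hc : CodeAt u.mem u.rip [0xf2, 0x0f, 0x5a, 0xc0]) (hr : L.Has u.rip 4)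
    (h_rax : u.reg .rax = rax) (h_rcx : u.reg .rcx = rcx) (h_rdx : u.reg .rdx = rdx) (h_rbx : u.reg .rbx = rbx) (h_rsp : u.reg .rsp = rsp) (h_rbp : u.reg .rbp = rbp) (h_rsi : u.reg .rsi = rsi) (h_rdi : u.reg .rdi = rdi) (h_r8 : u.reg .r8 = r8) (h_r9 : u.reg .r9 = r9) (h_r10 : u.reg .r10 = r10) (h_r11 : u.reg .r11 = r11) (h_r12 : u.reg .r12 = r12) (h_r13 : u.reg .r13 = r13) (h_r14 : u.reg .r14 = r14) (h_r15 : u.reg .r15 = r15)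
    (h_rip : u.rip = 0x10b9a7) (h_fl : u.flags = fl) (hμ : UserX.MicroOK μ) (hs : SseOK u)
    (hHas : ∀ a n, L.Has a n) (hQ : ∀ v, Q v) : Step L μ u Q := by
  u_step_at d_cvtsd2ss_x_x hc hr [h_rax, h_rcx, h_rdx, h_rbx, h_rsp, h_rbp, h_rsi, h_rdi, h_r8, h_r9, h_r10, h_r11, h_r12, h_r13, h_r14, h_r15, h_rip, h_fl, hμ.vendor]
  u_expect_goals [cont]
  all_goals first | exact hHas _ _ | exact hQ _

/-- `cvtsi2sd xmm2,DWORD PTR [rsp+0xc]` -/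
example (hc : CodeAt u.mem u.rip [0xf2, 0x0f, 0x2a, 0x54, 0x24, 0x0c]) (hr : L.Has u.rip 6)
    (h_rax : u.reg .rax = rax) (h_rcx : u.reg .rcx = rcx) (h_rdx : u.reg .rdx = rdx) (h_rbx : u.reg .rbx = rbx) (h_rsp : u.reg .rsp = rsp) (h_rbp : u.reg .rbp = rbp) (h_rsi : u.reg .rsi = rsi) (h_rdi : u.reg .rdi = rdi) (h_r8 : u.reg .r8 = r8) (h_r9 : u.reg .r9 = r9) (h_r10 : u.reg .r10 = r10) (h_r11 : u.reg .r11 = r11) (h_r12 : u.reg .r12 = r12) (h_r13 : u.reg .r13 = r13) (h_r14 : u.reg .r14 = r14) (h_r15 : u.reg .r15 = r15)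
    (h_rip : u.rip = 0x10bc9e) (h_fl : u.flags = fl) (hμ : UserX.MicroOK μ) (hs : SseOK u)
    (hHas : ∀ a n, L.Has a n) (hQ : ∀ v, Q v) : Step L μ u Q := by
  u_step_at d_cvtsi2sd_x_m32_base hc hr [h_rax, h_rcx, h_rdx, h_rbx, h_rsp, h_rbp, h_rsi, h_rdi, h_r8, h_r9, h_r10, h_r11, h_r12, h_r13, h_r14, h_r15, h_rip, h_fl, hμ.vendor]
  u_expect_goals [side_has, cont]
  all_goals first | exact hHas _ _ | exact hQ _

/-- `cvtsi2sd xmm3,eax` -/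
example (hc : CodeAt u.mem u.rip [0xf2, 0x0f, 0x2a, 0xd8]) (hr : L.Has u.rip 4)
    (h_rax : u.reg .rax = rax) (h_rcx : u.reg .rcx = rcx) (h_rdx : u.reg .rdx = rdx) (h_rbx : u.reg .rbx = rbx) (h_rsp : u.reg .rsp = rsp) (h_rbp : u.reg .rbp = rbp) (h_rsi : u.reg .rsi = rsi) (h_rdi : u.reg .rdi = rdi) (h_r8 : u.reg .r8 = r8) (h_r9 : u.reg .r9 = r9) (h_r10 : u.reg .r10 = r10) (h_r11 : u.reg .r11 = r11) (h_r12 : u.reg .r12 = r12) (h_r13 : u.reg .r13 = r13) (h_r14 : u.reg .r14 = r14) (h_r15 : u.reg .r15 = r15)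
    (h_rip : u.rip = 0x102a71) (h_fl : u.flags = fl) (hμ : UserX.MicroOK μ) (hs : SseOK u)
    (hHas : ∀ a n, L.Has a n) (hQ : ∀ v, Q v) : Step L μ u Q := by
  u_step_at d_cvtsi2sd_x_r32 hc hr [h_rax, h_rcx, h_rdx, h_rbx, h_rsp, h_rbp, h_rsi, h_rdi, h_r8, h_r9, h_r10, h_r11, h_r12, h_r13, h_r14, h_r15, h_rip, h_fl, hμ.vendor]
  u_expect_goals [cont]
  all_goals first | exact hHas _ _ | exact hQ _

/-- `cvtsi2sd xmm1,rax` -/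
example (hc : CodeAt u.mem u.rip [0xf2, 0x48, 0x0f, 0x2a, 0xc8]) (hr : L.Has u.rip 5)
    (h_rax : u.reg .rax = rax) (h_rcx : u.reg .rcx = rcx) (h_rdx : u.reg .rdx = rdx) (h_rbx : u.reg .rbx = rbx) (h_rsp : u.reg .rsp = rsp) (h_rbp : u.reg .rbp = rbp) (h_rsi : u.reg .rsi = rsi) (h_rdi : u.reg .rdi = rdi) (h_r8 : u.reg .r8 = r8) (h_r9 : u.reg .r9 = r9) (h_r10 : u.reg .r10 = r10) (h_r11 : u.reg .r11 = r11) (h_r12 : u.reg .r12 = r12) (h_r13 : u.reg .r13 = r13) (h_r14 : u.reg .r14 = r14) (h_r15 : u.reg .r15 = r15)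
    (h_rip : u.rip = 0x1023a1) (h_fl : u.flags = fl) (hμ : UserX.MicroOK μ) (hs : SseOK u)
    (hHas : ∀ a n, L.Has a n) (hQ : ∀ v, Q v) : Step L μ u Q := by
  u_step_at d_cvtsi2sd_x_r64 hc hr [h_rax, h_rcx, h_rdx, h_rbx, h_rsp, h_rbp, h_rsi, h_rdi, h_r8, h_r9, h_r10, h_r11, h_r12, h_r13, h_r14, h_r15, h_rip, h_fl, hμ.vendor]
  u_expect_goals [cont]
  all_goals first | exact hHas _ _ | exact hQ _

/-- `cvtsi2ss xmm0,edi` -/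
example (hc : CodeAt u.mem u.rip [0xf3, 0x0f, 0x2a, 0xc7]) (hr : L.Has u.rip 4)
    (h_rax : u.reg .rax = rax) (h_rcx : u.reg .rcx = rcx) (h_rdx : u.reg .rdx = rdx) (h_rbx : u.reg .rbx = rbx) (h_rsp : u.reg .rsp = rsp) (h_rbp : u.reg .rbp = rbp) (h_rsi : u.reg .rsi = rsi) (h_rdi : u.reg .rdi = rdi) (h_r8 : u.reg .r8 = r8) (h_r9 : u.reg .r9 = r9) (h_r10 : u.reg .r10 = r10) (h_r11 : u.reg .r11 = r11) (h_r12 : u.reg .r12 = r12) (h_r13 : u.reg .r13 = r13) (h_r14 : u.reg .r14 = r14) (h_r15 : u.reg .r15 = r15)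
    (h_rip : u.rip = 0x10ba71) (h_fl : u.flags = fl) (hμ : UserX.MicroOK μ) (hs : SseOK u)
    (hHas : ∀ a n, L.Has a n) (hQ : ∀ v, Q v) : Step L μ u Q := by
  u_step_at d_cvtsi2ss_x_r32 hc hr [h_rax, h_rcx, h_rdx, h_rbx, h_rsp, h_rbp, h_rsi, h_rdi, h_r8, h_r9, h_r10, h_r11, h_r12, h_r13, h_r14, h_r15, h_rip, h_fl, hμ.vendor]
  u_expect_goals [cont]
  all_goals first | exact hHas _ _ | exact hQ _

/-- `cvtss2sd xmm0,DWORD PTR [rsp+0xc]` -/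
example (hc : CodeAt u.mem u.rip [0xf3, 0x0f, 0x5a, 0x44, 0x24, 0x0c]) (hr : L.Has u.rip 6)
    (h_rax : u.reg .rax = rax) (h_rcx : u.reg .rcx = rcx) (h_rdx : u.reg .rdx = rdx) (h_rbx : u.reg .rbx = rbx) (h_rsp : u.reg .rsp = rsp) (h_rbp : u.reg .rbp = rbp) (h_rsi : u.reg .rsi = rsi) (h_rdi : u.reg .rdi = rdi) (h_r8 : u.reg .r8 = r8) (h_r9 : u.reg .r9 = r9) (h_r10 : u.reg .r10 = r10) (h_r11 : u.reg .r11 = r11) (h_r12 : u.reg .r12 = r12) (h_r13 : u.reg .r13 = r13) (h_r14 : u.reg .r14 = r14) (h_r15 : u.reg .r15 = r15)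
    (h_rip : u.rip = 0x10bb15) (h_fl : u.flags = fl) (hμ : UserX.MicroOK μ) (hs : SseOK u)
    (hHas : ∀ a n, L.Has a n) (hQ : ∀ v, Q v) : Step L μ u Q := by
  u_step_at d_cvtss2sd_x_m32_base hc hr [h_rax, h_rcx, h_rdx, h_rbx, h_rsp, h_rbp, h_rsi, h_rdi, h_r8, h_r9, h_r10, h_r11, h_r12, h_r13, h_r14, h_r15, h_rip, h_fl, hμ.vendor]
  u_expect_goals [side_has, cont]
  all_goals first | exact hHas _ _ | exact hQ _

/-- `cvtss2sd xmm0,xmm0` -/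
example (hc : CodeAt u.mem u.rip [0xf3, 0x0f, 0x5a, 0xc0]) (hr : L.Has u.rip 4)
    (h_rax : u.reg .rax = rax) (h_rcx : u.reg .rcx = rcx) (h_rdx : u.reg .rdx = rdx) (h_rbx : u.reg .rbx = rbx) (h_rsp : u.reg .rsp = rsp) (h_rbp : u.reg .rbp = rbp) (h_rsi : u.reg .rsi = rsi) (h_rdi : u.reg .rdi = rdi) (h_r8 : u.reg .r8 = r8) (h_r9 : u.reg .r9 = r9) (h_r10 : u.reg .r10 = r10) (h_r11 : u.reg .r11 = r11) (h_r12 : u.reg .r12 = r12) (h_r13 : u.reg .r13 = r13) (h_r14 : u.reg .r14 = r14) (h_r15 : u.reg .r15 = r15)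
    (h_rip : u.rip = 0x10b9b1) (h_fl : u.flags = fl) (hμ : UserX.MicroOK μ) (hs : SseOK u)
    (hHas : ∀ a n, L.Has a n) (hQ : ∀ v, Q v) : Step L μ u Q := by
  u_step_at d_cvtss2sd_x_x hc hr [h_rax, h_rcx, h_rdx, h_rbx, h_rsp, h_rbp, h_rsi, h_rdi, h_r8, h_r9, h_r10, h_r11, h_r12, h_r13, h_r14, h_r15, h_rip, h_fl, hμ.vendor]
  u_expect_goals [cont]
  all_goals first | exact hHas _ _ | exact hQ _

/-- `cvttsd2si eax,xmm1` -/
example (hc : CodeAt u.mem u.rip [0xf2, 0x0f, 0x2c, 0xc1]) (hr : L.Has u.rip 4)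
    (h_rax : u.reg .rax = rax) (h_rcx : u.reg .rcx = rcx) (h_rdx : u.reg .rdx = rdx) (h_rbx : u.reg .rbx = rbx) (h_rsp : u.reg .rsp = rsp) (h_rbp : u.reg .rbp = rbp) (h_rsi : u.reg .rsi = rsi) (h_rdi : u.reg .rdi = rdi) (h_r8 : u.reg .r8 = r8) (h_r9 : u.reg .r9 = r9) (h_r10 : u.reg .r10 = r10) (h_r11 : u.reg .r11 = r11) (h_r12 : u.reg .r12 = r12) (h_r13 : u.reg .r13 = r13) (h_r14 : u.reg .r14 = r14) (h_r15 : u.reg .r15 = r15)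
    (h_rip : u.rip = 0x1024b1) (h_fl : u.flags = fl) (hμ : UserX.MicroOK μ) (hs : SseOK u)
    (hHas : ∀ a n, L.Has a n) (hQ : ∀ v, Q v) : Step L μ u Q := by
  u_step_at d_cvttsd2si_r32_x hc hr [h_rax, h_rcx, h_rdx, h_rbx, h_rsp, h_rbp, h_rsi, h_rdi, h_r8, h_r9, h_r10, h_r11, h_r12, h_r13, h_r14, h_r15, h_rip, h_fl, hμ.vendor]
  u_expect_goals [cont]
  all_goals first | exact hHas _ _ | exact hQ _

/-- `cvttsd2si rax,xmm0` -/
example (hc : CodeAt u.mem u.rip [0xf2, 0x48, 0x0f, 0x2c, 0xc0]) (hr : L.Has u.rip 5)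
    (h_rax : u.reg .rax = rax) (h_rcx : u.reg .rcx = rcx) (h_rdx : u.reg .rdx = rdx) (h_rbx : u.reg .rbx = rbx) (h_rsp : u.reg .rsp = rsp) (h_rbp : u.reg .rbp = rbp) (h_rsi : u.reg .rsi = rsi) (h_rdi : u.reg .rdi = rdi) (h_r8 : u.reg .r8 = r8) (h_r9 : u.reg .r9 = r9) (h_r10 : u.reg .r10 = r10) (h_r11 : u.reg .r11 = r11) (h_r12 : u.reg .r12 = r12) (h_r13 : u.reg .r13 = r13) (h_r14 : u.reg .r14 = r14) (h_r15 : u.reg .r15 = r15)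
    (h_rip : u.rip = 0x102398) (h_fl : u.flags = fl) (hμ : UserX.MicroOK μ) (hs : SseOK u)
    (hHas : ∀ a n, L.Has a n) (hQ : ∀ v, Q v) : Step L μ u Q := by
  u_step_at d_cvttsd2si_r64_x hc hr [h_rax, h_rcx, h_rdx, h_rbx, h_rsp, h_rbp, h_rsi, h_rdi, h_r8, h_r9, h_r10, h_r11, h_r12, h_r13, h_r14, h_r15, h_rip, h_fl, hμ.vendor]
  u_expect_goals [cont]
  all_goals first | exact hHas _ _ | exact hQ _

/-- `divsd xmm0,QWORD PTR [rsp+0x28]` -/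
example (hc : CodeAt u.mem u.rip [0xf2, 0x0f, 0x5e, 0x44, 0x24, 0x28]) (hr : L.Has u.rip 6)
    (h_rax : u.reg .rax = rax) (h_rcx : u.reg .rcx = rcx) (h_rdx : u.reg .rdx = rdx) (h_rbx : u.reg .rbx = rbx) (h_rsp : u.reg .rsp = rsp) (h_rbp : u.reg .rbp = rbp) (h_rsi : u.reg .rsi = rsi) (h_rdi : u.reg .rdi = rdi) (h_r8 : u.reg .r8 = r8) (h_r9 : u.reg .r9 = r9) (h_r10 : u.reg .r10 = r10) (h_r11 : u.reg .r11 = r11) (h_r12 : u.reg .r12 = r12) (h_r13 : u.reg .r13 = r13) (h_r14 : u.reg .r14 = r14) (h_r15 : u.reg .r15 = r15)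
    (h_rip : u.rip = 0x10bd30) (h_fl : u.flags = fl) (hμ : UserX.MicroOK μ) (hs : SseOK u)
    (hHas : ∀ a n, L.Has a n) (hQ : ∀ v, Q v) : Step L μ u Q := by
  u_step_at d_divsd_x_m64_base hc hr [h_rax, h_rcx, h_rdx, h_rbx, h_rsp, h_rbp, h_rsi, h_rdi, h_r8, h_r9, h_r10, h_r11, h_r12, h_r13, h_r14, h_r15, h_rip, h_fl, hμ.vendor]
  u_expect_goals [side_has, cont]
  all_goals first | exact hHas _ _ | exact hQ _

/-- `divsd xmm3,QWORD PTR [rip+0x1e1f4]` -/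
example (hc : CodeAt u.mem u.rip [0xf2, 0x0f, 0x5e, 0x1d, 0xf4, 0xe1, 0x01, 0x00]) (hr : L.Has u.rip 8)
    (h_rax : u.reg .rax = rax) (h_rcx : u.reg .rcx = rcx) (h_rdx : u.reg .rdx = rdx) (h_rbx : u.reg .rbx = rbx) (h_rsp : u.reg .rsp = rsp) (h_rbp : u.reg .rbp = rbp) (h_rsi : u.reg .rsi = rsi) (h_rdi : u.reg .rdi = rdi) (h_r8 : u.reg .r8 = r8) (h_r9 : u.reg .r9 = r9) (h_r10 : u.reg .r10 = r10) (h_r11 : u.reg .r11 = r11) (h_r12 : u.reg .r12 = r12) (h_r13 : u.reg .r13 = r13) (h_r14 : u.reg .r14 = r14) (h_r15 : u.reg .r15 = r15)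
    (h_rip : u.rip = 0x101e6c) (h_fl : u.flags = fl) (hμ : UserX.MicroOK μ) (hs : SseOK u)
    (hHas : ∀ a n, L.Has a n) (hQ : ∀ v, Q v) : Step L μ u Q := by
  u_step_at d_divsd_x_m64_rip hc hr [h_rax, h_rcx, h_rdx, h_rbx, h_rsp, h_rbp, h_rsi, h_rdi, h_r8, h_r9, h_r10, h_r11, h_r12, h_r13, h_r14, h_r15, h_rip, h_fl, hμ.vendor]
  u_expect_goals [side_has, cont]
  all_goals first | exact hHas _ _ | exact hQ _

/-- `divsd xmm2,xmm0` -/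
example (hc : CodeAt u.mem u.rip [0xf2, 0x0f, 0x5e, 0xd0]) (hr : L.Has u.rip 4)
    (h_rax : u.reg .rax = rax) (h_rcx : u.reg .rcx = rcx) (h_rdx : u.reg .rdx = rdx) (h_rbx : u.reg .rbx = rbx) (h_rsp : u.reg .rsp = rsp) (h_rbp : u.reg .rbp = rbp) (h_rsi : u.reg .rsi = rsi) (h_rdi : u.reg .rdi = rdi) (h_r8 : u.reg .r8 = r8) (h_r9 : u.reg .r9 = r9) (h_r10 : u.reg .r10 = r10) (h_r11 : u.reg .r11 = r11) (h_r12 : u.reg .r12 = r12) (h_r13 : u.reg .r13 = r13) (h_r14 : u.reg .r14 = r14) (h_r15 : u.reg .r15 = r15)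
    (h_rip : u.rip = 0x1029d9) (h_fl : u.flags = fl) (hμ : UserX.MicroOK μ) (hs : SseOK u)
    (hHas : ∀ a n, L.Has a n) (hQ : ∀ v, Q v) : Step L μ u Q := by
  u_step_at d_divsd_x_x hc hr [h_rax, h_rcx, h_rdx, h_rbx, h_rsp, h_rbp, h_rsi, h_rdi, h_r8, h_r9, h_r10, h_r11, h_r12, h_r13, h_r14, h_r15, h_rip, h_fl, hμ.vendor]
  u_expect_goals [cont]
  all_goals first | exact hHas _ _ | exact hQ _

/-- `divss xmm0,xmm1` -/
example (hc : CodeAt u.mem u.rip [0xf3, 0x0f, 0x5e, 0xc1]) (hr : L.Has u.rip 4)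
    (h_rax : u.reg .rax = rax) (h_rcx : u.reg .rcx = rcx) (h_rdx : u.reg .rdx = rdx) (h_rbx : u.reg .rbx = rbx) (h_rsp : u.reg .rsp = rsp) (h_rbp : u.reg .rbp = rbp) (h_rsi : u.reg .rsi = rsi) (h_rdi : u.reg .rdi = rdi) (h_r8 : u.reg .r8 = r8) (h_r9 : u.reg .r9 = r9) (h_r10 : u.reg .r10 = r10) (h_r11 : u.reg .r11 = r11) (h_r12 : u.reg .r12 = r12) (h_r13 : u.reg .r13 = r13) (h_r14 : u.reg .r14 = r14) (h_r15 : u.reg .r15 = r15)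
    (h_rip : u.rip = 0x10ba8b) (h_fl : u.flags = fl) (hμ : UserX.MicroOK μ) (hs : SseOK u)
    (hHas : ∀ a n, L.Has a n) (hQ : ∀ v, Q v) : Step L μ u Q := by
  u_step_at d_divss_x_x hc hr [h_rax, h_rcx, h_rdx, h_rbx, h_rsp, h_rbp, h_rsi, h_rdi, h_r8, h_r9, h_r10, h_r11, h_r12, h_r13, h_r14, h_r15, h_rip, h_fl, hμ.vendor]
  u_expect_goals [cont]
  all_goals first | exact hHas _ _ | exact hQ _

/-- `movapd xmm0,xmm1` -/
example (hc : CodeAt u.mem u.rip [0x66, 0x0f, 0x28, 0xc1]) (hr : L.Has u.rip 4)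
    (h_rax : u.reg .rax = rax) (h_rcx : u.reg .rcx = rcx) (h_rdx : u.reg .rdx = rdx) (h_rbx : u.reg .rbx = rbx) (h_rsp : u.reg .rsp = rsp) (h_rbp : u.reg .rbp = rbp) (h_rsi : u.reg .rsi = rsi) (h_rdi : u.reg .rdi = rdi) (h_r8 : u.reg .r8 = r8) (h_r9 : u.reg .r9 = r9) (h_r10 : u.reg .r10 = r10) (h_r11 : u.reg .r11 = r11) (h_r12 : u.reg .r12 = r12) (h_r13 : u.reg .r13 = r13) (h_r14 : u.reg .r14 = r14) (h_r15 : u.reg .r15 = r15)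
    (h_rip : u.rip = 0x101dc0) (h_fl : u.flags = fl) (hμ : UserX.MicroOK μ) (hs : SseOK u)
    (hHas : ∀ a n, L.Has a n) (hQ : ∀ v, Q v) : Step L μ u Q := by
  u_step_at d_movapd_x_x hc hr [h_rax, h_rcx, h_rdx, h_rbx, h_rsp, h_rbp, h_rsi, h_rdi, h_r8, h_r9, h_r10, h_r11, h_r12, h_r13, h_r14, h_r15, h_rip, h_fl, hμ.vendor]
  u_expect_goals [cont]
  all_goals first | exact hHas _ _ | exact hQ _

/-- `movaps xmm0,xmm4` -/
example (hc : CodeAt u.mem u.rip [0x0f, 0x28, 0xc4]) (hr : L.Has u.rip 3)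
    (h_rax : u.reg .rax = rax) (h_rcx : u.reg .rcx = rcx) (h_rdx : u.reg .rdx = rdx) (h_rbx : u.reg .rbx = rbx) (h_rsp : u.reg .rsp = rsp) (h_rbp : u.reg .rbp = rbp) (h_rsi : u.reg .rsi = rsi) (h_rdi : u.reg .rdi = rdi) (h_r8 : u.reg .r8 = r8) (h_r9 : u.reg .r9 = r9) (h_r10 : u.reg .r10 = r10) (h_r11 : u.reg .r11 = r11) (h_r12 : u.reg .r12 = r12) (h_r13 : u.reg .r13 = r13) (h_r14 : u.reg .r14 = r14) (h_r15 : u.reg .r15 = r15)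
    (h_rip : u.rip = 0x1050a8) (h_fl : u.flags = fl) (hμ : UserX.MicroOK μ) (hs : SseOK u)
    (hHas : ∀ a n, L.Has a n) (hQ : ∀ v, Q v) : Step L μ u Q := by
  u_step_at d_movaps_x_x hc hr [h_rax, h_rcx, h_rdx, h_rbx, h_rsp, h_rbp, h_rsi, h_rdi, h_r8, h_r9, h_r10, h_r11, h_r12, h_r13, h_r14, h_r15, h_rip, h_fl, hμ.vendor]
  u_expect_goals [cont]
  all_goals first | exact hHas _ _ | exact hQ _

/-- `movd r13d,xmm3` -/
example (hc : CodeAt u.mem u.rip [0x66, 0x41, 0x0f, 0x7e, 0xdd]) (hr : L.Has u.rip 5)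
    (h_rax : u.reg .rax = rax) (h_rcx : u.reg .rcx = rcx) (h_rdx : u.reg .rdx = rdx) (h_rbx : u.reg .rbx = rbx) (h_rsp : u.reg .rsp = rsp) (h_rbp : u.reg .rbp = rbp) (h_rsi : u.reg .rsi = rsi) (h_rdi : u.reg .rdi = rdi) (h_r8 : u.reg .r8 = r8) (h_r9 : u.reg .r9 = r9) (h_r10 : u.reg .r10 = r10) (h_r11 : u.reg .r11 = r11) (h_r12 : u.reg .r12 = r12) (h_r13 : u.reg .r13 = r13) (h_r14 : u.reg .r14 = r14) (h_r15 : u.reg .r15 = r15)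
    (h_rip : u.rip = 0x105094) (h_fl : u.flags = fl) (hμ : UserX.MicroOK μ) (hs : SseOK u)
    (hHas : ∀ a n, L.Has a n) (hQ : ∀ v, Q v) : Step L μ u Q := by
  u_step_at d_movd_r32_x hc hr [h_rax, h_rcx, h_rdx, h_rbx, h_rsp, h_rbp, h_rsi, h_rdi, h_r8, h_r9, h_r10, h_r11, h_r12, h_r13, h_r14, h_r15, h_rip, h_fl, hμ.vendor]
  u_expect_goals [cont]
  all_goals first | exact hHas _ _ | exact hQ _

/-- `movd xmm2,r15d` -/
example (hc : CodeAt u.mem u.rip [0x66, 0x41, 0x0f, 0x6e, 0xd7]) (hr : L.Has u.rip 5)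
    (h_rax : u.reg .rax = rax) (h_rcx : u.reg .rcx = rcx) (h_rdx : u.reg .rdx = rdx) (h_rbx : u.reg .rbx = rbx) (h_rsp : u.reg .rsp = rsp) (h_rbp : u.reg .rbp = rbp) (h_rsi : u.reg .rsi = rsi) (h_rdi : u.reg .rdi = rdi) (h_r8 : u.reg .r8 = r8) (h_r9 : u.reg .r9 = r9) (h_r10 : u.reg .r10 = r10) (h_r11 : u.reg .r11 = r11) (h_r12 : u.reg .r12 = r12) (h_r13 : u.reg .r13 = r13) (h_r14 : u.reg .r14 = r14) (h_r15 : u.reg .r15 = r15)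
    (h_rip : u.rip = 0x105022) (h_fl : u.flags = fl) (hμ : UserX.MicroOK μ) (hs : SseOK u)
    (hHas : ∀ a n, L.Has a n) (hQ : ∀ v, Q v) : Step L μ u Q := by
  u_step_at d_movd_x_r32 hc hr [h_rax, h_rcx, h_rdx, h_rbx, h_rsp, h_rbp, h_rsi, h_rdi, h_r8, h_r9, h_r10, h_r11, h_r12, h_r13, h_r14, h_r15, h_rip, h_fl, hμ.vendor]
  u_expect_goals [cont]
  all_goals first | exact hHas _ _ | exact hQ _

/-- `movdqu xmm0,XMMWORD PTR [rbp+0x0]` -/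
example (hc : CodeAt u.mem u.rip [0xf3, 0x0f, 0x6f, 0x45, 0x00]) (hr : L.Has u.rip 5)
    (h_rax : u.reg .rax = rax) (h_rcx : u.reg .rcx = rcx) (h_rdx : u.reg .rdx = rdx) (h_rbx : u.reg .rbx = rbx) (h_rsp : u.reg .rsp = rsp) (h_rbp : u.reg .rbp = rbp) (h_rsi : u.reg .rsi = rsi) (h_rdi : u.reg .rdi = rdi) (h_r8 : u.reg .r8 = r8) (h_r9 : u.reg .r9 = r9) (h_r10 : u.reg .r10 = r10) (h_r11 : u.reg .r11 = r11) (h_r12 : u.reg .r12 = r12) (h_r13 : u.reg .r13 = r13) (h_r14 : u.reg .r14 = r14) (h_r15 : u.reg .r15 = r15)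
    (h_rip : u.rip = 0x108031) (h_fl : u.flags = fl) (hμ : UserX.MicroOK μ) (hs : SseOK u)
    (hHas : ∀ a n, L.Has a n) (hQ : ∀ v, Q v) : Step L μ u Q := by
  u_step_at d_movdqu_x_m128_base hc hr [h_rax, h_rcx, h_rdx, h_rbx, h_rsp, h_rbp, h_rsi, h_rdi, h_r8, h_r9, h_r10, h_r11, h_r12, h_r13, h_r14, h_r15, h_rip, h_fl, hμ.vendor]
  u_expect_goals [side_has, cont]
  all_goals first | exact hHas _ _ | exact hQ _

/-- `movq rbx,xmm0` -/
example (hc : CodeAt u.mem u.rip [0x66, 0x48, 0x0f, 0x7e, 0xc3]) (hr : L.Has u.rip 5)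
    (h_rax : u.reg .rax = rax) (h_rcx : u.reg .rcx = rcx) (h_rdx : u.reg .rdx = rdx) (h_rbx : u.reg .rbx = rbx) (h_rsp : u.reg .rsp = rsp) (h_rbp : u.reg .rbp = rbp) (h_rsi : u.reg .rsi = rsi) (h_rdi : u.reg .rdi = rdi) (h_r8 : u.reg .r8 = r8) (h_r9 : u.reg .r9 = r9) (h_r10 : u.reg .r10 = r10) (h_r11 : u.reg .r11 = r11) (h_r12 : u.reg .r12 = r12) (h_r13 : u.reg .r13 = r13) (h_r14 : u.reg .r14 = r14) (h_r15 : u.reg .r15 = r15)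
    (h_rip : u.rip = 0x102450) (h_fl : u.flags = fl) (hμ : UserX.MicroOK μ) (hs : SseOK u)
    (hHas : ∀ a n, L.Has a n) (hQ : ∀ v, Q v) : Step L μ u Q := by
  u_step_at d_movq_r64_x hc hr [h_rax, h_rcx, h_rdx, h_rbx, h_rsp, h_rbp, h_rsi, h_rdi, h_r8, h_r9, h_r10, h_r11, h_r12, h_r13, h_r14, h_r15, h_rip, h_fl, hμ.vendor]
  u_expect_goals [cont]
  all_goals first | exact hHas _ _ | exact hQ _

/-- `movq xmm0,rdi` -/
example (hc : CodeAt u.mem u.rip [0x66, 0x48, 0x0f, 0x6e, 0xc7]) (hr : L.Has u.rip 5)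
    (h_rax : u.reg .rax = rax) (h_rcx : u.reg .rcx = rcx) (h_rdx : u.reg .rdx = rdx) (h_rbx : u.reg .rbx = rbx) (h_rsp : u.reg .rsp = rsp) (h_rbp : u.reg .rbp = rbp) (h_rsi : u.reg .rsi = rsi) (h_rdi : u.reg .rdi = rdi) (h_r8 : u.reg .r8 = r8) (h_r9 : u.reg .r9 = r9) (h_r10 : u.reg .r10 = r10) (h_r11 : u.reg .r11 = r11) (h_r12 : u.reg .r12 = r12) (h_r13 : u.reg .r13 = r13) (h_r14 : u.reg .r14 = r14) (h_r15 : u.reg .r15 = r15)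
    (h_rip : u.rip = 0x101d0a) (h_fl : u.flags = fl) (hμ : UserX.MicroOK μ) (hs : SseOK u)
    (hHas : ∀ a n, L.Has a n) (hQ : ∀ v, Q v) : Step L μ u Q := by
  u_step_at d_movq_x_r64 hc hr [h_rax, h_rcx, h_rdx, h_rbx, h_rsp, h_rbp, h_rsi, h_rdi, h_r8, h_r9, h_r10, h_r11, h_r12, h_r13, h_r14, h_r15, h_rip, h_fl, hμ.vendor]
  u_expect_goals [cont]
  all_goals first | exact hHas _ _ | exact hQ _

/-- `movsd QWORD PTR [rsp],xmm0` -/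
example (hc : CodeAt u.mem u.rip [0xf2, 0x0f, 0x11, 0x04, 0x24]) (hr : L.Has u.rip 5)
    (h_rax : u.reg .rax = rax) (h_rcx : u.reg .rcx = rcx) (h_rdx : u.reg .rdx = rdx) (h_rbx : u.reg .rbx = rbx) (h_rsp : u.reg .rsp = rsp) (h_rbp : u.reg .rbp = rbp) (h_rsi : u.reg .rsi = rsi) (h_rdi : u.reg .rdi = rdi) (h_r8 : u.reg .r8 = r8) (h_r9 : u.reg .r9 = r9) (h_r10 : u.reg .r10 = r10) (h_r11 : u.reg .r11 = r11) (h_r12 : u.reg .r12 = r12) (h_r13 : u.reg .r13 = r13) (h_r14 : u.reg .r14 = r14) (h_r15 : u.reg .r15 = r15)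
    (h_rip : u.rip = 0x102205) (h_fl : u.flags = fl) (hμ : UserX.MicroOK μ) (hs : SseOK u)
    (hHas : ∀ a n, L.Has a n) (hQ : ∀ v, Q v) : Step L μ u Q := by
  u_step_at d_movsd_m64_base_x hc hr [h_rax, h_rcx, h_rdx, h_rbx, h_rsp, h_rbp, h_rsi, h_rdi, h_r8, h_r9, h_r10, h_r11, h_r12, h_r13, h_r14, h_r15, h_rip, h_fl, hμ.vendor]
  u_expect_goals [side_has, cont]
  all_goals first | exact hHas _ _ | exact hQ _

/-- `movsd xmm1,QWORD PTR [rsp]` -/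
example (hc : CodeAt u.mem u.rip [0xf2, 0x0f, 0x10, 0x0c, 0x24]) (hr : L.Has u.rip 5)
    (h_rax : u.reg .rax = rax) (h_rcx : u.reg .rcx = rcx) (h_rdx : u.reg .rdx = rdx) (h_rbx : u.reg .rbx = rbx) (h_rsp : u.reg .rsp = rsp) (h_rbp : u.reg .rbp = rbp) (h_rsi : u.reg .rsi = rsi) (h_rdi : u.reg .rdi = rdi) (h_r8 : u.reg .r8 = r8) (h_r9 : u.reg .r9 = r9) (h_r10 : u.reg .r10 = r10) (h_r11 : u.reg .r11 = r11) (h_r12 : u.reg .r12 = r12) (h_r13 : u.reg .r13 = r13) (h_r14 : u.reg .r14 = r14) (h_r15 : u.reg .r15 = r15)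
    (h_rip : u.rip = 0x10221e) (h_fl : u.flags = fl) (hμ : UserX.MicroOK μ) (hs : SseOK u)
    (hHas : ∀ a n, L.Has a n) (hQ : ∀ v, Q v) : Step L μ u Q := by
  u_step_at d_movsd_x_m64_base hc hr [h_rax, h_rcx, h_rdx, h_rbx, h_rsp, h_rbp, h_rsi, h_rdi, h_r8, h_r9, h_r10, h_r11, h_r12, h_r13, h_r14, h_r15, h_rip, h_fl, hμ.vendor]
  u_expect_goals [side_has, cont]
  all_goals first | exact hHas _ _ | exact hQ _

/-- `movsd xmm1,QWORD PTR [rip+0x1e2b8]` -/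
example (hc : CodeAt u.mem u.rip [0xf2, 0x0f, 0x10, 0x0d, 0xb8, 0xe2, 0x01, 0x00]) (hr : L.Has u.rip 8)
    (h_rax : u.reg .rax = rax) (h_rcx : u.reg .rcx = rcx) (h_rdx : u.reg .rdx = rdx) (h_rbx : u.reg .rbx = rbx) (h_rsp : u.reg .rsp = rsp) (h_rbp : u.reg .rbp = rbp) (h_rsi : u.reg .rsi = rsi) (h_rdi : u.reg .rdi = rdi) (h_r8 : u.reg .r8 = r8) (h_r9 : u.reg .r9 = r9) (h_r10 : u.reg .r10 = r10) (h_r11 : u.reg .r11 = r11) (h_r12 : u.reg .r12 = r12) (h_r13 : u.reg .r13 = r13) (h_r14 : u.reg .r14 = r14) (h_r15 : u.reg .r15 = r15)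
    (h_rip : u.rip = 0x101da0) (h_fl : u.flags = fl) (hμ : UserX.MicroOK μ) (hs : SseOK u)
    (hHas : ∀ a n, L.Has a n) (hQ : ∀ v, Q v) : Step L μ u Q := by
  u_step_at d_movsd_x_m64_rip hc hr [h_rax, h_rcx, h_rdx, h_rbx, h_rsp, h_rbp, h_rsi, h_rdi, h_r8, h_r9, h_r10, h_r11, h_r12, h_r13, h_r14, h_r15, h_rip, h_fl, hμ.vendor]
  u_expect_goals [side_has, cont]
  all_goals first | exact hHas _ _ | exact hQ _

/-- `movss DWORD PTR [rsp+0x8],xmm6` -/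
example (hc : CodeAt u.mem u.rip [0xf3, 0x0f, 0x11, 0x74, 0x24, 0x08]) (hr : L.Has u.rip 6)
    (h_rax : u.reg .rax = rax) (h_rcx : u.reg .rcx = rcx) (h_rdx : u.reg .rdx = rdx) (h_rbx : u.reg .rbx = rbx) (h_rsp : u.reg .rsp = rsp) (h_rbp : u.reg .rbp = rbp) (h_rsi : u.reg .rsi = rsi) (h_rdi : u.reg .rdi = rdi) (h_r8 : u.reg .r8 = r8) (h_r9 : u.reg .r9 = r9) (h_r10 : u.reg .r10 = r10) (h_r11 : u.reg .r11 = r11) (h_r12 : u.reg .r12 = r12) (h_r13 : u.reg .r13 = r13) (h_r14 : u.reg .r14 = r14) (h_r15 : u.reg .r15 = r15)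
    (h_rip : u.rip = 0x105027) (h_fl : u.flags = fl) (hμ : UserX.MicroOK μ) (hs : SseOK u)
    (hHas : ∀ a n, L.Has a n) (hQ : ∀ v, Q v) : Step L μ u Q := by
  u_step_at d_movss_m32_base_x hc hr [h_rax, h_rcx, h_rdx, h_rbx, h_rsp, h_rbp, h_rsi, h_rdi, h_r8, h_r9, h_r10, h_r11, h_r12, h_r13, h_r14, h_r15, h_rip, h_fl, hμ.vendor]
  u_expect_goals [side_has, cont]
  all_goals first | exact hHas _ _ | exact hQ _

/-- `movss xmm6,DWORD PTR [rbx]` -/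
example (hc : CodeAt u.mem u.rip [0xf3, 0x0f, 0x10, 0x33]) (hr : L.Has u.rip 4)
    (h_rax : u.reg .rax = rax) (h_rcx : u.reg .rcx = rcx) (h_rdx : u.reg .rdx = rdx) (h_rbx : u.reg .rbx = rbx) (h_rsp : u.reg .rsp = rsp) (h_rbp : u.reg .rbp = rbp) (h_rsi : u.reg .rsi = rsi) (h_rdi : u.reg .rdi = rdi) (h_r8 : u.reg .r8 = r8) (h_r9 : u.reg .r9 = r9) (h_r10 : u.reg .r10 = r10) (h_r11 : u.reg .r11 = r11) (h_r12 : u.reg .r12 = r12) (h_r13 : u.reg .r13 = r13) (h_r14 : u.reg .r14 = r14) (h_r15 : u.reg .r15 = r15)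
    (h_rip : u.rip = 0x10501e) (h_fl : u.flags = fl) (hμ : UserX.MicroOK μ) (hs : SseOK u)
    (hHas : ∀ a n, L.Has a n) (hQ : ∀ v, Q v) : Step L μ u Q := by
  u_step_at d_movss_x_m32_base hc hr [h_rax, h_rcx, h_rdx, h_rbx, h_rsp, h_rbp, h_rsi, h_rdi, h_r8, h_r9, h_r10, h_r11, h_r12, h_r13, h_r14, h_r15, h_rip, h_fl, hμ.vendor]
  u_expect_goals [side_has, cont]
  all_goals first | exact hHas _ _ | exact hQ _

/-- `movss xmm1,DWORD PTR [rip+0x1980b]` -/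
example (hc : CodeAt u.mem u.rip [0xf3, 0x0f, 0x10, 0x0d, 0x0b, 0x98, 0x01, 0x00]) (hr : L.Has u.rip 8)
    (h_rax : u.reg .rax = rax) (h_rcx : u.reg .rcx = rcx) (h_rdx : u.reg .rdx = rdx) (h_rbx : u.reg .rbx = rbx) (h_rsp : u.reg .rsp = rsp) (h_rbp : u.reg .rbp = rbp) (h_rsi : u.reg .rsi = rsi) (h_rdi : u.reg .rdi = rdi) (h_r8 : u.reg .r8 = r8) (h_r9 : u.reg .r9 = r9) (h_r10 : u.reg .r10 = r10) (h_r11 : u.reg .r11 = r11) (h_r12 : u.reg .r12 = r12) (h_r13 : u.reg .r13 = r13) (h_r14 : u.reg .r14 = r14) (h_r15 : u.reg .r15 = r15)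
    (h_rip : u.rip = 0x106bed) (h_fl : u.flags = fl) (hμ : UserX.MicroOK μ) (hs : SseOK u)
    (hHas : ∀ a n, L.Has a n) (hQ : ∀ v, Q v) : Step L μ u Q := by
  u_step_at d_movss_x_m32_rip hc hr [h_rax, h_rcx, h_rdx, h_rbx, h_rsp, h_rbp, h_rsi, h_rdi, h_r8, h_r9, h_r10, h_r11, h_r12, h_r13, h_r14, h_r15, h_rip, h_fl, hμ.vendor]
  u_expect_goals [side_has, cont]
  all_goals first | exact hHas _ _ | exact hQ _

/-- `movups XMMWORD PTR [rbx+0x70],xmm0` -/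
example (hc : CodeAt u.mem u.rip [0x0f, 0x11, 0x43, 0x70]) (hr : L.Has u.rip 4)
    (h_rax : u.reg .rax = rax) (h_rcx : u.reg .rcx = rcx) (h_rdx : u.reg .rdx = rdx) (h_rbx : u.reg .rbx = rbx) (h_rsp : u.reg .rsp = rsp) (h_rbp : u.reg .rbp = rbp) (h_rsi : u.reg .rsi = rsi) (h_rdi : u.reg .rdi = rdi) (h_r8 : u.reg .r8 = r8) (h_r9 : u.reg .r9 = r9) (h_r10 : u.reg .r10 = r10) (h_r11 : u.reg .r11 = r11) (h_r12 : u.reg .r12 = r12) (h_r13 : u.reg .r13 = r13) (h_r14 : u.reg .r14 = r14) (h_r15 : u.reg .r15 = r15)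
    (h_rip : u.rip = 0x108036) (h_fl : u.flags = fl) (hμ : UserX.MicroOK μ) (hs : SseOK u)
    (hHas : ∀ a n, L.Has a n) (hQ : ∀ v, Q v) : Step L μ u Q := by
  u_step_at d_movups_m128_base_x hc hr [h_rax, h_rcx, h_rdx, h_rbx, h_rsp, h_rbp, h_rsi, h_rdi, h_r8, h_r9, h_r10, h_r11, h_r12, h_r13, h_r14, h_r15, h_rip, h_fl, hμ.vendor]
  u_expect_goals [side_has, cont]
  all_goals first | exact hHas _ _ | exact hQ _

/-- `mulsd xmm0,QWORD PTR [rsp]` -/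
example (hc : CodeAt u.mem u.rip [0xf2, 0x0f, 0x59, 0x04, 0x24]) (hr : L.Has u.rip 5)
    (h_rax : u.reg .rax = rax) (h_rcx : u.reg .rcx = rcx) (h_rdx : u.reg .rdx = rdx) (h_rbx : u.reg .rbx = rbx) (h_rsp : u.reg .rsp = rsp) (h_rbp : u.reg .rbp = rbp) (h_rsi : u.reg .rsi = rsi) (h_rdi : u.reg .rdi = rdi) (h_r8 : u.reg .r8 = r8) (h_r9 : u.reg .r9 = r9) (h_r10 : u.reg .r10 = r10) (h_r11 : u.reg .r11 = r11) (h_r12 : u.reg .r12 = r12) (h_r13 : u.reg .r13 = r13) (h_r14 : u.reg .r14 = r14) (h_r15 : u.reg .r15 = r15)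
    (h_rip : u.rip = 0x1022ab) (h_fl : u.flags = fl) (hμ : UserX.MicroOK μ) (hs : SseOK u)
    (hHas : ∀ a n, L.Has a n) (hQ : ∀ v, Q v) : Step L μ u Q := by
  u_step_at d_mulsd_x_m64_base hc hr [h_rax, h_rcx, h_rdx, h_rbx, h_rsp, h_rbp, h_rsi, h_rdi, h_r8, h_r9, h_r10, h_r11, h_r12, h_r13, h_r14, h_r15, h_rip, h_fl, hμ.vendor]
  u_expect_goals [side_has, cont]
  all_goals first | exact hHas _ _ | exact hQ _

/-- `mulsd xmm0,QWORD PTR [rip+0x1dfe0]` -/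
example (hc : CodeAt u.mem u.rip [0xf2, 0x0f, 0x59, 0x05, 0xe0, 0xdf, 0x01, 0x00]) (hr : L.Has u.rip 8)
    (h_rax : u.reg .rax = rax) (h_rcx : u.reg .rcx = rcx) (h_rdx : u.reg .rdx = rdx) (h_rbx : u.reg .rbx = rbx) (h_rsp : u.reg .rsp = rsp) (h_rbp : u.reg .rbp = rbp) (h_rsi : u.reg .rsi = rsi) (h_rdi : u.reg .rdi = rdi) (h_r8 : u.reg .r8 = r8) (h_r9 : u.reg .r9 = r9) (h_r10 : u.reg .r10 = r10) (h_r11 : u.reg .r11 = r11) (h_r12 : u.reg .r12 = r12) (h_r13 : u.reg .r13 = r13) (h_r14 : u.reg .r14 = r14) (h_r15 : u.reg .r15 = r15)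
    (h_rip : u.rip = 0x102108) (h_fl : u.flags = fl) (hμ : UserX.MicroOK μ) (hs : SseOK u)
    (hHas : ∀ a n, L.Has a n) (hQ : ∀ v, Q v) : Step L μ u Q := by
  u_step_at d_mulsd_x_m64_rip hc hr [h_rax, h_rcx, h_rdx, h_rbx, h_rsp, h_rbp, h_rsi, h_rdi, h_r8, h_r9, h_r10, h_r11, h_r12, h_r13, h_r14, h_r15, h_rip, h_fl, hμ.vendor]
  u_expect_goals [side_has, cont]
  all_goals first | exact hHas _ _ | exact hQ _

/-- `mulsd xmm0,xmm0` -/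
example (hc : CodeAt u.mem u.rip [0xf2, 0x0f, 0x59, 0xc0]) (hr : L.Has u.rip 4)
    (h_rax : u.reg .rax = rax) (h_rcx : u.reg .rcx = rcx) (h_rdx : u.reg .rdx = rdx) (h_rbx : u.reg .rbx = rbx) (h_rsp : u.reg .rsp = rsp) (h_rbp : u.reg .rbp = rbp) (h_rsi : u.reg .rsi = rsi) (h_rdi : u.reg .rdi = rdi) (h_r8 : u.reg .r8 = r8) (h_r9 : u.reg .r9 = r9) (h_r10 : u.reg .r10 = r10) (h_r11 : u.reg .r11 = r11) (h_r12 : u.reg .r12 = r12) (h_r13 : u.reg .r13 = r13) (h_r14 : u.reg .r14 = r14) (h_r15 : u.reg .r15 = r15)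
    (h_rip : u.rip = 0x101daa) (h_fl : u.flags = fl) (hμ : UserX.MicroOK μ) (hs : SseOK u)
    (hHas : ∀ a n, L.Has a n) (hQ : ∀ v, Q v) : Step L μ u Q := by
  u_step_at d_mulsd_x_x hc hr [h_rax, h_rcx, h_rdx, h_rbx, h_rsp, h_rbp, h_rsi, h_rdi, h_r8, h_r9, h_r10, h_r11, h_r12, h_r13, h_r14, h_r15, h_rip, h_fl, hμ.vendor]
  u_expect_goals [cont]
  all_goals first | exact hHas _ _ | exact hQ _

/-- `mulss xmm3,DWORD PTR [rbp+0x0]` -/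
example (hc : CodeAt u.mem u.rip [0xf3, 0x0f, 0x59, 0x5d, 0x00]) (hr : L.Has u.rip 5)
    (h_rax : u.reg .rax = rax) (h_rcx : u.reg .rcx = rcx) (h_rdx : u.reg .rdx = rdx) (h_rbx : u.reg .rbx = rbx) (h_rsp : u.reg .rsp = rsp) (h_rbp : u.reg .rbp = rbp) (h_rsi : u.reg .rsi = rsi) (h_rdi : u.reg .rdi = rdi) (h_r8 : u.reg .r8 = r8) (h_r9 : u.reg .r9 = r9) (h_r10 : u.reg .r10 = r10) (h_r11 : u.reg .r11 = r11) (h_r12 : u.reg .r12 = r12) (h_r13 : u.reg .r13 = r13) (h_r14 : u.reg .r14 = r14) (h_r15 : u.reg .r15 = r15)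
    (h_rip : u.rip = 0x10508f) (h_fl : u.flags = fl) (hμ : UserX.MicroOK μ) (hs : SseOK u)
    (hHas : ∀ a n, L.Has a n) (hQ : ∀ v, Q v) : Step L μ u Q := by
  u_step_at d_mulss_x_m32_base hc hr [h_rax, h_rcx, h_rdx, h_rbx, h_rsp, h_rbp, h_rsi, h_rdi, h_r8, h_r9, h_r10, h_r11, h_r12, h_r13, h_r14, h_r15, h_rip, h_fl, hμ.vendor]
  u_expect_goals [side_has, cont]
  all_goals first | exact hHas _ _ | exact hQ _

/-- `mulss xmm0,DWORD PTR [rip+0x14788]` -/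
example (hc : CodeAt u.mem u.rip [0xf3, 0x0f, 0x59, 0x05, 0x88, 0x47, 0x01, 0x00]) (hr : L.Has u.rip 8)
    (h_rax : u.reg .rax = rax) (h_rcx : u.reg .rcx = rcx) (h_rdx : u.reg .rdx = rdx) (h_rbx : u.reg .rbx = rbx) (h_rsp : u.reg .rsp = rsp) (h_rbp : u.reg .rbp = rbp) (h_rsi : u.reg .rsi = rsi) (h_rdi : u.reg .rdi = rdi) (h_r8 : u.reg .r8 = r8) (h_r9 : u.reg .r9 = r9) (h_r10 : u.reg .r10 = r10) (h_r11 : u.reg .r11 = r11) (h_r12 : u.reg .r12 = r12) (h_r13 : u.reg .r13 = r13) (h_r14 : u.reg .r14 = r14) (h_r15 : u.reg .r15 = r15)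
    (h_rip : u.rip = 0x10bd54) (h_fl : u.flags = fl) (hμ : UserX.MicroOK μ) (hs : SseOK u)
    (hHas : ∀ a n, L.Has a n) (hQ : ∀ v, Q v) : Step L μ u Q := by
  u_step_at d_mulss_x_m32_rip hc hr [h_rax, h_rcx, h_rdx, h_rbx, h_rsp, h_rbp, h_rsi, h_rdi, h_r8, h_r9, h_r10, h_r11, h_r12, h_r13, h_r14, h_r15, h_rip, h_fl, hμ.vendor]
  u_expect_goals [side_has, cont]
  all_goals first | exact hHas _ _ | exact hQ _

/-- `mulss xmm0,DWORD PTR [r13*4+0x120680]` -/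
example (hc : CodeAt u.mem u.rip [0xf3, 0x42, 0x0f, 0x59, 0x04, 0xad, 0x80, 0x06, 0x12, 0x00]) (hr : L.Has u.rip 10)
    (h_rax : u.reg .rax = rax) (h_rcx : u.reg .rcx = rcx) (h_rdx : u.reg .rdx = rdx) (h_rbx : u.reg .rbx = rbx) (h_rsp : u.reg .rsp = rsp) (h_rbp : u.reg .rbp = rbp) (h_rsi : u.reg .rsi = rsi) (h_rdi : u.reg .rdi = rdi) (h_r8 : u.reg .r8 = r8) (h_r9 : u.reg .r9 = r9) (h_r10 : u.reg .r10 = r10) (h_r11 : u.reg .r11 = r11) (h_r12 : u.reg .r12 = r12) (h_r13 : u.reg .r13 = r13) (h_r14 : u.reg .r14 = r14) (h_r15 : u.reg .r15 = r15)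
    (h_rip : u.rip = 0x1087cd) (h_fl : u.flags = fl) (hμ : UserX.MicroOK μ) (hs : SseOK u)
    (hHas : ∀ a n, L.Has a n) (hQ : ∀ v, Q v) : Step L μ u Q := by
  u_step_at d_mulss_x_m32_sib hc hr [h_rax, h_rcx, h_rdx, h_rbx, h_rsp, h_rbp, h_rsi, h_rdi, h_r8, h_r9, h_r10, h_r11, h_r12, h_r13, h_r14, h_r15, h_rip, h_fl, hμ.vendor]
  u_expect_goals [side_has, cont]
  all_goals first | exact hHas _ _ | exact hQ _

/-- `mulss xmm0,xmm0` -/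
example (hc : CodeAt u.mem u.rip [0xf3, 0x0f, 0x59, 0xc0]) (hr : L.Has u.rip 4)
    (h_rax : u.reg .rax = rax) (h_rcx : u.reg .rcx = rcx) (h_rdx : u.reg .rdx = rdx) (h_rbx : u.reg .rbx = rbx) (h_rsp : u.reg .rsp = rsp) (h_rbp : u.reg .rbp = rbp) (h_rsi : u.reg .rsi = rsi) (h_rdi : u.reg .rdi = rdi) (h_r8 : u.reg .r8 = r8) (h_r9 : u.reg .r9 = r9) (h_r10 : u.reg .r10 = r10) (h_r11 : u.reg .r11 = r11) (h_r12 : u.reg .r12 = r12) (h_r13 : u.reg .r13 = r13) (h_r14 : u.reg .r14 = r14) (h_r15 : u.reg .r15 = r15)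
    (h_rip : u.rip = 0x104060) (h_fl : u.flags = fl) (hμ : UserX.MicroOK μ) (hs : SseOK u)
    (hHas : ∀ a n, L.Has a n) (hQ : ∀ v, Q v) : Step L μ u Q := by
  u_step_at d_mulss_x_x hc hr [h_rax, h_rcx, h_rdx, h_rbx, h_rsp, h_rbp, h_rsi, h_rdi, h_r8, h_r9, h_r10, h_r11, h_r12, h_r13, h_r14, h_r15, h_rip, h_fl, hμ.vendor]
  u_expect_goals [cont]
  all_goals first | exact hHas _ _ | exact hQ _

/-- `pxor xmm1,xmm1` -/
example (hc : CodeAt u.mem u.rip [0x66, 0x0f, 0xef, 0xc9]) (hr : L.Has u.rip 4)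
    (h_rax : u.reg .rax = rax) (h_rcx : u.reg .rcx = rcx) (h_rdx : u.reg .rdx = rdx) (h_rbx : u.reg .rbx = rbx) (h_rsp : u.reg .rsp = rsp) (h_rbp : u.reg .rbp = rbp) (h_rsi : u.reg .rsi = rsi) (h_rdi : u.reg .rdi = rdi) (h_r8 : u.reg .r8 = r8) (h_r9 : u.reg .r9 = r9) (h_r10 : u.reg .r10 = r10) (h_r11 : u.reg .r11 = r11) (h_r12 : u.reg .r12 = r12) (h_r13 : u.reg .r13 = r13) (h_r14 : u.reg .r14 = r14) (h_r15 : u.reg .r15 = r15)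
    (h_rip : u.rip = 0x10239d) (h_fl : u.flags = fl) (hμ : UserX.MicroOK μ) (hs : SseOK u)
    (hHas : ∀ a n, L.Has a n) (hQ : ∀ v, Q v) : Step L μ u Q := by
  u_step_at d_pxor_x_x hc hr [h_rax, h_rcx, h_rdx, h_rbx, h_rsp, h_rbp, h_rsi, h_rdi, h_r8, h_r9, h_r10, h_r11, h_r12, h_r13, h_r14, h_r15, h_rip, h_fl, hμ.vendor]
  u_expect_goals [cont]
  all_goals first | exact hHas _ _ | exact hQ _

/-- `subsd xmm1,QWORD PTR [rip+0x1dcac]` -/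
example (hc : CodeAt u.mem u.rip [0xf2, 0x0f, 0x5c, 0x0d, 0xac, 0xdc, 0x01, 0x00]) (hr : L.Has u.rip 8)
    (h_rax : u.reg .rax = rax) (h_rcx : u.reg .rcx = rcx) (h_rdx : u.reg .rdx = rdx) (h_rbx : u.reg .rbx = rbx) (h_rsp : u.reg .rsp = rsp) (h_rbp : u.reg .rbp = rbp) (h_rsi : u.reg .rsi = rsi) (h_rdi : u.reg .rdi = rdi) (h_r8 : u.reg .r8 = r8) (h_r9 : u.reg .r9 = r9) (h_r10 : u.reg .r10 = r10) (h_r11 : u.reg .r11 = r11) (h_r12 : u.reg .r12 = r12) (h_r13 : u.reg .r13 = r13) (h_r14 : u.reg .r14 = r14) (h_r15 : u.reg .r15 = r15)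
    (h_rip : u.rip = 0x1023ac) (h_fl : u.flags = fl) (hμ : UserX.MicroOK μ) (hs : SseOK u)
    (hHas : ∀ a n, L.Has a n) (hQ : ∀ v, Q v) : Step L μ u Q := by
  u_step_at d_subsd_x_m64_rip hc hr [h_rax, h_rcx, h_rdx, h_rbx, h_rsp, h_rbp, h_rsi, h_rdi, h_r8, h_r9, h_r10, h_r11, h_r12, h_r13, h_r14, h_r15, h_rip, h_fl, hμ.vendor]
  u_expect_goals [side_has, cont]
  all_goals first | exact hHas _ _ | exact hQ _

/-- `subsd xmm4,xmm3` -/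
example (hc : CodeAt u.mem u.rip [0xf2, 0x0f, 0x5c, 0xe3]) (hr : L.Has u.rip 4)
    (h_rax : u.reg .rax = rax) (h_rcx : u.reg .rcx = rcx) (h_rdx : u.reg .rdx = rdx) (h_rbx : u.reg .rbx = rbx) (h_rsp : u.reg .rsp = rsp) (h_rbp : u.reg .rbp = rbp) (h_rsi : u.reg .rsi = rsi) (h_rdi : u.reg .rdi = rdi) (h_r8 : u.reg .r8 = r8) (h_r9 : u.reg .r9 = r9) (h_r10 : u.reg .r10 = r10) (h_r11 : u.reg .r11 = r11) (h_r12 : u.reg .r12 = r12) (h_r13 : u.reg .r13 = r13) (h_r14 : u.reg .r14 = r14) (h_r15 : u.reg .r15 = r15)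
    (h_rip : u.rip = 0x101e80) (h_fl : u.flags = fl) (hμ : UserX.MicroOK μ) (hs : SseOK u)
    (hHas : ∀ a n, L.Has a n) (hQ : ∀ v, Q v) : Step L μ u Q := by
  u_step_at d_subsd_x_x hc hr [h_rax, h_rcx, h_rdx, h_rbx, h_rsp, h_rbp, h_rsi, h_rdi, h_r8, h_r9, h_r10, h_r11, h_r12, h_r13, h_r14, h_r15, h_rip, h_fl, hμ.vendor]
  u_expect_goals [cont]
  all_goals first | exact hHas _ _ | exact hQ _

/-- `subss xmm4,DWORD PTR [rbx-0x4]` -/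
example (hc : CodeAt u.mem u.rip [0xf3, 0x0f, 0x5c, 0x63, 0xfc]) (hr : L.Has u.rip 5)
    (h_rax : u.reg .rax = rax) (h_rcx : u.reg .rcx = rcx) (h_rdx : u.reg .rdx = rdx) (h_rbx : u.reg .rbx = rbx) (h_rsp : u.reg .rsp = rsp) (h_rbp : u.reg .rbp = rbp) (h_rsi : u.reg .rsi = rsi) (h_rdi : u.reg .rdi = rdi) (h_r8 : u.reg .r8 = r8) (h_r9 : u.reg .r9 = r9) (h_r10 : u.reg .r10 = r10) (h_r11 : u.reg .r11 = r11) (h_r12 : u.reg .r12 = r12) (h_r13 : u.reg .r13 = r13) (h_r14 : u.reg .r14 = r14) (h_r15 : u.reg .r15 = r15)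
    (h_rip : u.rip = 0x105054) (h_fl : u.flags = fl) (hμ : UserX.MicroOK μ) (hs : SseOK u)
    (hHas : ∀ a n, L.Has a n) (hQ : ∀ v, Q v) : Step L μ u Q := by
  u_step_at d_subss_x_m32_base hc hr [h_rax, h_rcx, h_rdx, h_rbx, h_rsp, h_rbp, h_rsi, h_rdi, h_r8, h_r9, h_r10, h_r11, h_r12, h_r13, h_r14, h_r15, h_rip, h_fl, hμ.vendor]
  u_expect_goals [side_has, cont]
  all_goals first | exact hHas _ _ | exact hQ _

/-- `subss xmm2,xmm6` -/
example (hc : CodeAt u.mem u.rip [0xf3, 0x0f, 0x5c, 0xd6]) (hr : L.Has u.rip 4)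
    (h_rax : u.reg .rax = rax) (h_rcx : u.reg .rcx = rcx) (h_rdx : u.reg .rdx = rdx) (h_rbx : u.reg .rbx = rbx) (h_rsp : u.reg .rsp = rsp) (h_rbp : u.reg .rbp = rbp) (h_rsi : u.reg .rsi = rsi) (h_rdi : u.reg .rdi = rdi) (h_r8 : u.reg .r8 = r8) (h_r9 : u.reg .r9 = r9) (h_r10 : u.reg .r10 = r10) (h_r11 : u.reg .r11 = r11) (h_r12 : u.reg .r12 = r12) (h_r13 : u.reg .r13 = r13) (h_r14 : u.reg .r14 = r14) (h_r15 : u.reg .r15 = r15)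
    (h_rip : u.rip = 0x10502d) (h_fl : u.flags = fl) (hμ : UserX.MicroOK μ) (hs : SseOK u)
    (hHas : ∀ a n, L.Has a n) (hQ : ∀ v, Q v) : Step L μ u Q := by
  u_step_at d_subss_x_x hc hr [h_rax, h_rcx, h_rdx, h_rbx, h_rsp, h_rbp, h_rsi, h_rdi, h_r8, h_r9, h_r10, h_r11, h_r12, h_r13, h_r14, h_r15, h_rip, h_fl, hμ.vendor]
  u_expect_goals [cont]
  all_goals first | exact hHas _ _ | exact hQ _

/-- `ucomisd xmm4,xmm4` -/
example (hc : CodeAt u.mem u.rip [0x66, 0x0f, 0x2e, 0xe4]) (hr : L.Has u.rip 4)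
    (h_rax : u.reg .rax = rax) (h_rcx : u.reg .rcx = rcx) (h_rdx : u.reg .rdx = rdx) (h_rbx : u.reg .rbx = rbx) (h_rsp : u.reg .rsp = rsp) (h_rbp : u.reg .rbp = rbp) (h_rsi : u.reg .rsi = rsi) (h_rdi : u.reg .rdi = rdi) (h_r8 : u.reg .r8 = r8) (h_r9 : u.reg .r9 = r9) (h_r10 : u.reg .r10 = r10) (h_r11 : u.reg .r11 = r11) (h_r12 : u.reg .r12 = r12) (h_r13 : u.reg .r13 = r13) (h_r14 : u.reg .r14 = r14) (h_r15 : u.reg .r15 = r15)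
    (h_rip : u.rip = 0x1025db) (h_fl : u.flags = fl) (hμ : UserX.MicroOK μ) (hs : SseOK u)
    (hHas : ∀ a n, L.Has a n) (hQ : ∀ v, Q v) : Step L μ u Q := by
  u_step_at d_ucomisd_x_x hc hr [h_rax, h_rcx, h_rdx, h_rbx, h_rsp, h_rbp, h_rsi, h_rdi, h_r8, h_r9, h_r10, h_r11, h_r12, h_r13, h_r14, h_r15, h_rip, h_fl, hμ.vendor]
  u_expect_goals [cont]
  all_goals first | exact hHas _ _ | exact hQ _

/-- `xorpd xmm0,XMMWORD PTR [rip+0x1db2d]` -/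
example (hc : CodeAt u.mem u.rip [0x66, 0x0f, 0x57, 0x05, 0x2d, 0xdb, 0x01, 0x00]) (hr : L.Has u.rip 8)
    (h_rax : u.reg .rax = rax) (h_rcx : u.reg .rcx = rcx) (h_rdx : u.reg .rdx = rdx) (h_rbx : u.reg .rbx = rbx) (h_rsp : u.reg .rsp = rsp) (h_rbp : u.reg .rbp = rbp) (h_rsi : u.reg .rsi = rsi) (h_rdi : u.reg .rdi = rdi) (h_r8 : u.reg .r8 = r8) (h_r9 : u.reg .r9 = r9) (h_r10 : u.reg .r10 = r10) (h_r11 : u.reg .r11 = r11) (h_r12 : u.reg .r12 = r12) (h_r13 : u.reg .r13 = r13) (h_r14 : u.reg .r14 = r14) (h_r15 : u.reg .r15 = r15)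
    (h_rip : u.rip = 0x1024cb) (h_fl : u.flags = fl) (hμ : UserX.MicroOK μ) (hs : SseOK u)
    (hHas : ∀ a n, L.Has a n) (hQ : ∀ v, Q v) : Step L μ u Q := by
  u_step_at d_xorpd_x_m128_rip hc hr [h_rax, h_rcx, h_rdx, h_rbx, h_rsp, h_rbp, h_rsi, h_rdi, h_r8, h_r9, h_r10, h_r11, h_r12, h_r13, h_r14, h_r15, h_rip, h_fl, hμ.vendor]
  u_expect_goals [side_has, cont]
  all_goals first | exact hHas _ _ | exact hQ _

/-- `xorps xmm0,XMMWORD PTR [rip+0x17026]` -/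
example (hc : CodeAt u.mem u.rip [0x0f, 0x57, 0x05, 0x26, 0x70, 0x01, 0x00]) (hr : L.Has u.rip 7)
    (h_rax : u.reg .rax = rax) (h_rcx : u.reg .rcx = rcx) (h_rdx : u.reg .rdx = rdx) (h_rbx : u.reg .rbx = rbx) (h_rsp : u.reg .rsp = rsp) (h_rbp : u.reg .rbp = rbp) (h_rsi : u.reg .rsi = rsi) (h_rdi : u.reg .rdi = rdi) (h_r8 : u.reg .r8 = r8) (h_r9 : u.reg .r9 = r9) (h_r10 : u.reg .r10 = r10) (h_r11 : u.reg .r11 = r11) (h_r12 : u.reg .r12 = r12) (h_r13 : u.reg .r13 = r13) (h_r14 : u.reg .r14 = r14) (h_r15 : u.reg .r15 = r15)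
    (h_rip : u.rip = 0x1093d3) (h_fl : u.flags = fl) (hμ : UserX.MicroOK μ) (hs : SseOK u)
    (hHas : ∀ a n, L.Has a n) (hQ : ∀ v, Q v) : Step L μ u Q := by
  u_step_at d_xorps_x_m128_rip hc hr [h_rax, h_rcx, h_rdx, h_rbx, h_rsp, h_rbp, h_rsi, h_rdi, h_r8, h_r9, h_r10, h_r11, h_r12, h_r13, h_r14, h_r15, h_rip, h_fl, hμ.vendor]
  u_expect_goals [side_has, cont]
  all_goals first | exact hHas _ _ | exact hQ _

/-- `xorps xmm0,xmm1` -/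
example (hc : CodeAt u.mem u.rip [0x0f, 0x57, 0xc1]) (hr : L.Has u.rip 3)
    (h_rax : u.reg .rax = rax) (h_rcx : u.reg .rcx = rcx) (h_rdx : u.reg .rdx = rdx) (h_rbx : u.reg .rbx = rbx) (h_rsp : u.reg .rsp = rsp) (h_rbp : u.reg .rbp = rbp) (h_rsi : u.reg .rsi = rsi) (h_rdi : u.reg .rdi = rdi) (h_r8 : u.reg .r8 = r8) (h_r9 : u.reg .r9 = r9) (h_r10 : u.reg .r10 = r10) (h_r11 : u.reg .r11 = r11) (h_r12 : u.reg .r12 = r12) (h_r13 : u.reg .r13 = r13) (h_r14 : u.reg .r14 = r14) (h_r15 : u.reg .r15 = r15)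
    (h_rip : u.rip = 0x106bfb) (h_fl : u.flags = fl) (hμ : UserX.MicroOK μ) (hs : SseOK u)
    (hHas : ∀ a n, L.Has a n) (hQ : ∀ v, Q v) : Step L μ u Q := by
  u_step_at d_xorps_x_x hc hr [h_rax, h_rcx, h_rdx, h_rbx, h_rsp, h_rbp, h_rsi, h_rdi, h_r8, h_r9, h_r10, h_r11, h_r12, h_r13, h_r14, h_r15, h_rip, h_fl, hμ.vendor]
  u_expect_goals [cont]
  all_goals first | exact hHas _ _ | exact hQ _

end

/-! ### The state a step leaves, pinned

One example per kind of result. The opaque values are universally quantified in the hypothesis about `Q`: the step's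
`x1` / `mx1` / `cmp1` instantiate them. -/

section
variable {L : Layout} {μ : Microarch} {u : State} {Q : State → Prop}

/-- `movss xmm6, [rbx]`: XMM6 takes SOME value; the side condition is the four bytes at RBX (found in the context). -/
example (rbx : Word) (hc : CodeAt u.mem u.rip [0xf3, 0x0f, 0x10, 0x33]) (hr : L.Has u.rip 4)
    (h_rbx : u.reg .rbx = rbx) (h_rip : u.rip = 0x10501e) (hμ : UserX.MicroOK μ)
    (hsrc : L.Has rbx 4)
    (hQ : ∀ x : Vec, Q ((u.writeVecLow .v128 6 x).setRip 0x105022)) : Step L μ u Q := by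
  u_step_at d_movss_x_m32_base hc hr [h_rbx, h_rip, hμ.vendor]
  exact hQ x1

/-- `movss [rsp+8], xmm6`: SOME 32-bit value is stored, in the stepper's form of a 4-byte store. -/
example (rsp : Word) (hc : CodeAt u.mem u.rip [0xf3, 0x0f, 0x11, 0x74, 0x24, 0x08]) (hr : L.Has u.rip 6)
    (h_rsp : u.reg .rsp = rsp) (h_rip : u.rip = 0x105027) (hμ : UserX.MicroOK μ)
    (hdst : L.Has (rsp + 8) 4)
    (hQ : ∀ x : BitVec 32, Q ((u.setMem (u.mem.writeLE (rsp + 8) 4 x.toNat)).setRip 0x10502d)) : Step L μ u Q := by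
  u_step_at d_movss_m32_base_x hc hr [h_rsp, h_rip, hμ.vendor]
  exact hQ x1

/-- `addss xmm0, [rsp+8]`: XMM0 and MXCSR take SOME values, the six exception masks of MXCSR stay set (`hmx1`). -/
example (rsp : Word) (hc : CodeAt u.mem u.rip [0xf3, 0x0f, 0x58, 0x44, 0x24, 0x08]) (hr : L.Has u.rip 6)
    (h_rsp : u.reg .rsp = rsp) (h_rip : u.rip = 0x105064) (hμ : UserX.MicroOK μ) (hs : SseOK u)
    (hsrc : L.Has (rsp + 8) 4)
    (hQ : ∀ (mx : Word) (x : Vec), mx &&& 0x1F80 = 0x1F80 → Q (((u.writeVecLow .v128 0 x).setMxcsr mx).setRip 0x10506a)) :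
    Step L μ u Q := by
  u_step_at d_addss_x_m32_base hc hr [h_rsp, h_rip, hμ.vendor]
  exact hQ mx1 x1 hmx1

/-- `comisd xmm1, xmm0`: RFLAGS takes the flags of ONE OF THE FOUR outcomes (over the flags `fl` the state had: one layer). -/
example (fl : Flags) (hc : CodeAt u.mem u.rip [0x66, 0x0f, 0x2f, 0xc8]) (hr : L.Has u.rip 4)
    (h_rip : u.rip = 0x102392) (h_fl : u.flags = fl) (hμ : UserX.MicroOK μ) (hs : SseOK u)
    (hQ : ∀ (mx : Word) (r : FP.Cmp), mx &&& 0x1F80 = 0x1F80 →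
      Q (((u.setMxcsr mx).setFlags (fl.setStatus (comisStatus r))).setRip 0x102396)) : Step L μ u Q := by
  u_step_at d_comisd_x_x hc hr [h_rip, h_fl, hμ.vendor]
  exact hQ mx1 cmp1 hmx1

/-- `cvttsd2si eax, xmm1`: RAX takes SOME zero-extended 32-bit value about which nothing is known. -/
example (hc : CodeAt u.mem u.rip [0xf2, 0x0f, 0x2c, 0xc1]) (hr : L.Has u.rip 4)
    (h_rip : u.rip = 0x100000) (hμ : UserX.MicroOK μ) (hs : SseOK u)
    (hQ : ∀ (mx : Word) (x : BitVec 32), mx &&& 0x1F80 = 0x1F80 →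
      Q (((u.setReg .rax (Word.ofBV x)).setMxcsr mx).setRip 0x100004)) : Step L μ u Q := by
  u_step_at d_cvttsd2si_r32_x hc hr [h_rip, hμ.vendor]
  exact hQ mx1 x1 hmx1

/-- `movd r13d, xmm3`: R13 takes SOME zero-extended 32-bit value. -/
example (hc : CodeAt u.mem u.rip [0x66, 0x41, 0x0f, 0x7e, 0xdd]) (hr : L.Has u.rip 5)
    (h_rip : u.rip = 0x100000) (hμ : UserX.MicroOK μ)
    (hQ : ∀ x : BitVec 32, Q ((u.setReg .r13 (Word.ofBV x)).setRip 0x100005)) : Step L μ u Q := by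
  u_step_at d_movd_r32_x hc hr [h_rip, hμ.vendor]
  exact hQ x1

/-- `mulss xmm0, [r13*4+0x120680]`: the operand's address is `index * scale + literal`. -/
example (r13 : Word) (hc : CodeAt u.mem u.rip [0xf3, 0x42, 0x0f, 0x59, 0x04, 0xad, 0x80, 0x06, 0x12, 0x00])
    (hr : L.Has u.rip 10) (h_r13 : u.reg .r13 = r13) (h_rip : u.rip = 0x100000) (hμ : UserX.MicroOK μ) (hs : SseOK u)
    (hsrc : L.Has (r13 * 4 + 0x120680) 4)
    (hQ : ∀ (mx : Word) (x : Vec), mx &&& 0x1F80 = 0x1F80 → Q (((u.writeVecLow .v128 0 x).setMxcsr mx).setRip 0x10000a)) :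
    Step L μ u Q := by
  u_step_at d_mulss_x_m32_sib hc hr [h_r13, h_rip, hμ.vendor]
  exact hQ mx1 x1 hmx1

/-- `xorps xmm0, [rip+0x17026]` at 1093D3H: a 16-byte operand under the legacy alignment rule. The address is a literal, its
alignment is evaluated; what is left is the range. -/
example (hc : CodeAt u.mem u.rip [0x0f, 0x57, 0x05, 0x26, 0x70, 0x01, 0x00]) (hr : L.Has u.rip 7)
    (h_rip : u.rip = 0x1093d3) (hμ : UserX.MicroOK μ)
    (hsrc : L.Has 0x120400 16)
    (hQ : ∀ x : Vec, Q ((u.writeVecLow .v128 0 x).setRip 0x1093da)) : Step L μ u Q := by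
  u_step_at d_xorps_x_m128_rip hc hr [h_rip, hμ.vendor]
  exact hQ x1

/-! ### What a missing hypothesis looks like

Without `MicroOK μ` / `SseOK u` in the context the step still goes through and leaves the hypothesis of the rule as a side goal
(`side_micro`, `side_sseok`) — not a stuck `wpUser`. -/

example (hc : CodeAt u.mem u.rip [0xf3, 0x0f, 0x58, 0xc1]) (hr : L.Has u.rip 4) (h_rip : u.rip = 0x100000)
    (hvendor : μ.vendor = .intel) (hmicro : SseMicro μ) (hsse : True → SseOK (u.setRip 0x100004)) (hQ : ∀ v, Q v) :
    Step L μ u Q := by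
  u_step_at d_addss_x_x hc hr [h_rip, hvendor]
  u_expect_goals [side_sseok, cont]
  · exact hsse trivial
  · exact hQ _

example (hc : CodeAt u.mem u.rip [0xf3, 0x0f, 0x10, 0x33]) (hr : L.Has u.rip 4) (h_rip : u.rip = 0x100000)
    (hvendor : μ.vendor = .intel) (hmicro : True → SseMicro μ) (hHas : ∀ a n, L.Has a n) (hQ : ∀ v, Q v) :
    Step L μ u Q := by
  u_step_at d_movss_x_m32_base hc hr [h_rip, hvendor]
  u_expect_goals [side_micro, side_has, cont]
  · exact hmicro trivial
  · exact hHas _ _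
  · exact hQ _

end

/-! ### The EXACT rules through the dispatcher

`u_exact_sse` makes the same steps leave the model's own terms. Pinned where the term is short. -/

section
variable {L : Layout} {μ : Microarch} {u : State} {Q : State → Prop}

/-- `movss [rsp+8], xmm6`, exact: the low 32 bits of XMM6 are stored. -/
example (rsp : Word) (hc : CodeAt u.mem u.rip [0xf3, 0x0f, 0x11, 0x74, 0x24, 0x08]) (hr : L.Has u.rip 6)
    (h_rsp : u.reg .rsp = rsp) (h_rip : u.rip = 0x100000) (hμ : UserX.MicroOK μ) (hdst : L.Has (rsp + 8) 4)
    (hQ : Q ((u.setMem (u.mem.writeLE (rsp + 8) 4 ((u.readVec .v512 6).trunc 32).toNat)).setRip 0x100006)) :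
    Step L μ u Q := by
  u_exact_sse (u_step_at d_movss_m32_base_x hc hr [h_rsp, h_rip, hμ.vendor])
  exact hQ

/-- `movd xmm2, r15d`, exact: the zero-extended low half of R15. -/
example (r15 : Word) (hc : CodeAt u.mem u.rip [0x66, 0x41, 0x0f, 0x6e, 0xd7]) (hr : L.Has u.rip 5)
    (h_r15 : u.reg .r15 = r15) (h_rip : u.rip = 0x100000) (hμ : UserX.MicroOK μ)
    (hQ : Q ((u.writeVecLow .v128 2 (Vec.ofWord (Word.ofBV (Word.part .w32 r15)))).setRip 0x100005)) :
    Step L μ u Q := by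
  u_exact_sse (u_step_at d_movd_x_r32 hc hr [h_r15, h_rip, hμ.vendor])
  exact hQ

/-- `movaps xmm0, xmm4`, exact. -/
example (hc : CodeAt u.mem u.rip [0x0f, 0x28, 0xc4]) (hr : L.Has u.rip 3)
    (h_rip : u.rip = 0x100000) (hμ : UserX.MicroOK μ)
    (hQ : Q ((u.writeVecLow .v128 0 (u.readVec .v512 4)).setRip 0x100003)) : Step L μ u Q := by
  u_exact_sse (u_step_at d_movaps_x_x hc hr [h_rip, hμ.vendor])
  exact hQ

/-- `addss xmm0, [rsp+8]`, exact: the model's `scalarArith` term in XMM0, `mxcsrAfter` in MXCSR (in the normal form: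
`writeVecLow` inside `setMxcsr`); and `SseOK` of that state is still found (`mxcsrAfter_masks`). -/
example (rsp : Word) (hc : CodeAt u.mem u.rip [0xf3, 0x0f, 0x58, 0x44, 0x24, 0x08]) (hr : L.Has u.rip 6)
    (h_rsp : u.reg .rsp = rsp) (h_rip : u.rip = 0x100000) (hμ : UserX.MicroOK μ) (hs : SseOK u)
    (hsrc : L.Has (rsp + 8) 4)
    (hQ : ∀ v : State, SseOK v → Q v) : Step L μ u Q := by
  u_exact_sse (u_step_at d_addss_x_m32_base hc hr [h_rsp, h_rip, hμ.vendor])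
  u_expect_goals [cont]
  -- ⊢ Q (((u.writeVecLow VWidth.v128 0 (… scalarArith 32 … u.mxcsr (u.readVec VWidth.v128 0) (BitVec.ofNat 512
  --        (u.mem.readLE (rsp + 8) 4)) …)).setMxcsr (mxcsrAfter u.mxcsr (scalarArith …).snd)).setRip 1048582)
  -- (never unify such a state against a pattern with holes in the FP positions: the unifier starts evaluating `FP.*`)
  refine hQ _ ?_
  u_sseok

end

/-! ### The EXACT rules, and `u_step_code`: the 16-byte struct copy of `vorbis_init`

`movdqu xmm0, [rbp]; movups [rbx+0x70], xmm0` (108031H, 108036H in the staged image: offsets 49 and 54 of `vorbis_init`) copies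
a 16-byte structure whose VALUE matters to the proof. Both instructions are stepped from the function's own bytes by
`u_step_code`, with the exact rules (`u_exact_sse`): the bytes stored are the bytes loaded. -/

-- vorbis_init: 207 bytes, at 0x108000
#code_bytes code_vorbis_init
  "55534883ec084889fb4889f5ba10070000be00000000e80595ffff4885ed743e"
  "488d7b70e8578affff4889efe88f89fffff30f6f45000f114370488d7b78e8fd"
  "85ffff8b6b7883e5f8896b78488dbb84000000e8c886ffff89ab84000000488d"
  "bb88000000e8b686ffffc7838800000000000000488dbb8c000000e8a086ffff"
  "c7838c00000000000000488d7b30e84d88ffff48c7433000000000488dbba800"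
  "0000e83988ffff48c783a800000000000000488dbb00070000e86286ffffc783"
  "00070000ffffffff4883c4085b5dc3"

section
variable {L : Layout} {μ : Microarch} {u : State} {Q : State → Prop}

/-- The code hypothesis for a state with the same memory (the walker's business; here for the second instruction). -/
theorem hasCode_of_mem_eq {v : State} {base : Word} {code : List Byte} (h : HasCode L u base code) (e : v.mem = u.mem) :
    HasCode L v base code := by
  unfold HasCode at *
  rw [e]
  exact h

/-- After the two instructions: XMM0 holds the 16 bytes at RBP (zero-extended), and the 16 bytes at RBX + 70H are THE 16 BYTES
AT RBP — a plain `readLE`, no vector vocabulary left. -/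
example (rbx rbp : Word) (h : HasCode L u 0x108000 code_vorbis_init)
    (hrip : u.rip = 0x108000 + UInt64.ofNat 49) (h_rbx : u.reg .rbx = rbx) (h_rbp : u.reg .rbp = rbp)
    (hμ : UserX.MicroOK μ) (hsrc : L.Has rbp 16) (hdst : L.Has (rbx + 0x70) 16)
    (hQ : Q (((u.writeVecLow .v128 0 (BitVec.ofNat 512 (u.mem.readLE rbp 16))).setMem
        (u.mem.writeLE (rbx + 0x70) 16 (u.mem.readLE rbp 16))).setRip 0x10803a)) :
    Step L μ u (fun u1 => Step L μ u1 Q) := by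
  u_exact_sse (u_step_code h 49 hrip [h_rbx, h_rbp, hrip, hμ.vendor])
  -- the state after the load, its code hypothesis and its RIP
  have h1 := hasCode_of_mem_eq
    (v := (u.writeVecLow .v128 0 (BitVec.ofNat 512 (u.mem.readLE rbp 16))).setRip 0x108036) h rfl
  have hrip1 : ((u.writeVecLow .v128 0 (BitVec.ofNat 512 (u.mem.readLE rbp 16))).setRip 0x108036).rip
      = 0x108000 + UInt64.ofNat 54 := rfl
  u_exact_sse (u_step_code h1 54 hrip1 [h_rbx, h_rbp, hrip, hμ.vendor])
  exact hQ

/-- The same two instructions with the default (opaque) rules: 16 bytes are stored, nothing is known of them. -/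
example (rbx rbp : Word) (h : HasCode L u 0x108000 code_vorbis_init)
    (hrip : u.rip = 0x108000 + UInt64.ofNat 49) (h_rbx : u.reg .rbx = rbx) (h_rbp : u.reg .rbp = rbp)
    (hμ : UserX.MicroOK μ) (hsrc : L.Has rbp 16) (hdst : L.Has (rbx + 0x70) 16)
    (hQ : ∀ (x : Vec) (y : BitVec 128),
      Q (((u.writeVecLow .v128 0 x).setMem (u.mem.writeLE (rbx + 0x70) 16 y.toNat)).setRip 0x10803a)) :
    Step L μ u (fun u1 => Step L μ u1 Q) := by
  u_step_code h 49 hrip [h_rbx, h_rbp, hrip, hμ.vendor]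
  have h1 := hasCode_of_mem_eq (v := (u.writeVecLow .v128 0 x1).setRip 0x108036) h rfl
  have hrip1 : ((u.writeVecLow .v128 0 x1).setRip 0x108036).rip = 0x108000 + UInt64.ofNat 54 := rfl
  u_step_code h1 54 hrip1 [h_rbx, h_rbp, hrip, hμ.vendor]
  exact hQ _ _

end

end X86.User.SseStepTest

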